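-- pv_equiv track=rewrite | github.com/wawzysys/Algorithm | 2024bishi/0911华为/1_1.py | min_distance_sum
-- ===== SOURCE A (Python) =====
-- from collections import deque
--
-- def min_distance_sum(m, n, grid):
--     directions = [(0, 1), (0, -1), (1, 0), (-1, 0)]
--     queue = deque()
--     distances = [[float('inf')] * n for _ in range(m)]
--     for i in range(m):
--         for j in range(n):
--             if grid[i][j] == 0:
--                 queue.append((i, j, 0))
--                 distances[i][j] = 0
--     while queue:
--         x, y, dist = queue.popleft()
--         for dx, dy in directions:
--             nx, ny = x + dx, y + dy
--             if 0 <= nx < m and 0 <= ny < n and grid[nx][ny] != -1: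
--                 if dist + 1 < distances[nx][ny]:
--                     distances[nx][ny] = dist + 1
--                     queue.append((nx, ny, dist + 1))
--
--     res = 0
--     for i in range(m):
--         for j in range(n):
--             if grid[i][j] == 1 and distances[i][j] != float('inf'):
--                 res += distances[i][j]
--     return res
-- ===== SOURCE B (Python) =====
-- def min_distance_sum(m, n, grid):
--     # queue-free pull-based label propagation (Jacobi/Bellman-Ford style):
--     # repeated whole-grid sweeps; at level d every still-unreached passable cell
--     # checks whether some 4-neighbour already carries distance d and, if so,
--     # takes distance d+1; stop at the first sweep that changes nothing.
--     dist = [[0 if grid[i][j] == 0 else None for j in range(n)] for i in range(m)]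
--     d = 0
--     while True:
--         changed = False
--         for i in range(m):
--             for j in range(n):
--                 if dist[i][j] is None and grid[i][j] != -1:
--                     for di, dj in ((0, 1), (0, -1), (1, 0), (-1, 0)):
--                         a, b = i + di, j + dj
--                         if 0 <= a < m and 0 <= b < n and dist[a][b] == d:
--                             dist[i][j] = d + 1
--                             changed = True
--                             break
--         if not changed:
--             break
--         d += 1
--     res = 0
--     for i in range(m):
--         for j in range(n):
--             if grid[i][j] == 1 and dist[i][j] is not None:
--                 res += dist[i][j]
--     return res
-- ===== Notes on version B (the rewrite author's own statement) =====
-- stated objective: alternative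
-- what changed: Replaces the queue-based push BFS (deque of (x,y,dist) triples with a relaxation test) by queue-free pull-based label propagation: repeated whole-grid sweeps in which every still-unreached passable cell checks whether a 4-neighbour already carries the current level d and takes d+1, until a sweep changes nothing; no queue or frontier structure is kept.
import Mathlib
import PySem

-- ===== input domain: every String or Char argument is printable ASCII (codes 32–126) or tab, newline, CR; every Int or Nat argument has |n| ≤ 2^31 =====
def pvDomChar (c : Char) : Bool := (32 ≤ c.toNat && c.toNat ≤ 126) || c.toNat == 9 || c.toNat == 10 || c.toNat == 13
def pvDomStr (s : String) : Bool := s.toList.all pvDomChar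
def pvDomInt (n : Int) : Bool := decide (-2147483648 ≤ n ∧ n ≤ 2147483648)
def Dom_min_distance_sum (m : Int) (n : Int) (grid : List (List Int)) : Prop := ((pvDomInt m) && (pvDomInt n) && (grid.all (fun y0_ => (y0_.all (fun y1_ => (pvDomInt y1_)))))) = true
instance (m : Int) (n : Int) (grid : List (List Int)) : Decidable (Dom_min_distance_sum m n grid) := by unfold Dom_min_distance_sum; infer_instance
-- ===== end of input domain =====

-- B replaces A's queue-based push BFS (deque of (x,y,dist) triples with a relaxation test)
-- by queue-free pull-based label propagation: repeated whole-grid sweeps in which every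
-- still-unreached passable cell takes level d+1 when a 4-neighbour carries level d.

-- shared primitive accessors (both Pythons index grid / the distance matrix the same way;
-- `none` plays the role of float('inf') / None, all accesses are guarded by bounds checks)
abbrev PvDists := List (List (Option Int))

def pvGcell (grid : List (List Int)) (i j : Int) : Int :=
  (grid.getD i.toNat []).getD j.toNat (-1)

def pvDget (D : PvDists) (i j : Int) : Option Int :=
  (D.getD i.toNat []).getD j.toNat none

def pvDset (D : PvDists) (i j : Int) (v : Int) : PvDists :=
  D.set i.toNat ((D.getD i.toNat []).set j.toNat (some v))

def pvDirs : List (Int × Int) := [(0, 1), (0, -1), (1, 0), (-1, 0)]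

-- ===== PORT A =====
-- Python's `w < float('inf')` / `w < v` on the distance matrix (none plays float('inf'))
def pvLtInf (w : Int) (o : Option Int) : Bool :=
  match o with
  | none => true
  | some v => decide (w < v)

-- one direction step of A's while-body: relax `dist+1 < distances[nx][ny]` and append the triple
def pvAstep (m n : Int) (grid : List (List Int)) (x y dist : Int)
    (p : List (Int × Int × Int) × PvDists) (dxy : Int × Int) : List (Int × Int × Int) × PvDists :=
  let nx := x + dxy.1
  let ny := y + dxy.2
  if 0 ≤ nx ∧ nx < m ∧ 0 ≤ ny ∧ ny < n ∧ pvGcell grid nx ny ≠ -1 then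
    if pvLtInf (dist + 1) (pvDget p.2 nx ny) then
      (p.1 ++ [(nx, ny, dist + 1)], pvDset p.2 nx ny (dist + 1))
    else p
  else p

-- A's `while queue:` loop; fuel bounds the number of pops (proved sufficient below)
def pvAloop (m n : Int) (grid : List (List Int)) : Nat → List (Int × Int × Int) → PvDists → PvDists
  | 0, _, D => D
  | _ + 1, [], D => D
  | f + 1, (x, y, dist) :: q, D =>
      let p := pvDirs.foldl (pvAstep m n grid x y dist) (q, D)
      pvAloop m n grid f p.1 p.2

-- A's initial scan: queue of (i,j,0) triples for 0-cells, distances 0 there, inf elsewhere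
def pvAinit (m n : Int) (grid : List (List Int)) : List (Int × Int × Int) × PvDists :=
  (PySem.List.pyRange 0 m 1).foldl (fun p i =>
    (PySem.List.pyRange 0 n 1).foldl (fun p j =>
      if pvGcell grid i j = 0 then (p.1 ++ [(i, j, (0 : Int))], pvDset p.2 i j 0) else p) p)
    ([], List.replicate m.toNat (List.replicate n.toNat (none : Option Int)))

-- A's final scan: sum distances of 1-cells with finite distance
def pvResScanA (m n : Int) (grid : List (List Int)) (D : PvDists) : Int :=
  (PySem.List.pyRange 0 m 1).foldl (fun r i =>
    (PySem.List.pyRange 0 n 1).foldl (fun r j =>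
      if pvGcell grid i j = 1 then
        match pvDget D i j with
        | some v => r + v
        | none => r
      else r) r) 0

def min_distance_sum (m : Int) (n : Int) (grid : List (List Int)) : Int :=
  let p := pvAinit m n grid
  pvResScanA m n grid (pvAloop m n grid (2 * (m.toNat * n.toNat) + 2) p.1 p.2)

-- ===== PORT B =====
-- B's initial matrix, built directly by comprehension: 0 at 0-cells, None elsewhere
def pvCinit (m n : Int) (grid : List (List Int)) : PvDists :=
  (PySem.List.pyRange 0 m 1).map (fun i =>
    (PySem.List.pyRange 0 n 1).map (fun j =>
      if pvGcell grid i j = 0 then some (0 : Int) else none))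

-- B's per-cell test during a sweep: unreached, passable, and some in-bounds neighbour at level d
-- (the `any` over the four directions mirrors Python's inner for-loop with break)
def pvCcell (m n : Int) (grid : List (List Int)) (d : Int)
    (s : Bool × PvDists) (i j : Int) : Bool × PvDists :=
  if pvDget s.2 i j = none ∧ pvGcell grid i j ≠ -1 ∧
      (pvDirs.any (fun e =>
        decide (0 ≤ i + e.1 ∧ i + e.1 < m ∧ 0 ≤ j + e.2 ∧ j + e.2 < n) &&
        (pvDget s.2 (i + e.1) (j + e.2) == some d))) = true
  then (true, pvDset s.2 i j (d + 1)) else s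

-- one whole-grid sweep at level d, returning the changed flag and the updated matrix
def pvSweep (m n : Int) (grid : List (List Int)) (d : Int) (D : PvDists) : Bool × PvDists :=
  (PySem.List.pyRange 0 m 1).foldl (fun s i =>
    (PySem.List.pyRange 0 n 1).foldl (fun s j => pvCcell m n grid d s i j) s) (false, D)

-- B's `while True:` loop: sweep, stop at the first unchanged sweep; fuel bounds the sweeps
def pvCloop (m n : Int) (grid : List (List Int)) : Nat → Int → PvDists → PvDists
  | 0, _, D => D
  | f + 1, d, D =>
      let s := pvSweep m n grid d D
      if s.1 then pvCloop m n grid f (d + 1) s.2 else s.2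

def pvResScanB (m n : Int) (grid : List (List Int)) (D : PvDists) : Int :=
  (PySem.List.pyRange 0 m 1).foldl (fun r i =>
    (PySem.List.pyRange 0 n 1).foldl (fun r j =>
      if pvGcell grid i j = 1 then
        match pvDget D i j with
        | some v => r + v
        | none => r
      else r) r) 0

def min_distance_sum_alt (m : Int) (n : Int) (grid : List (List Int)) : Int :=
  pvResScanB m n grid (pvCloop m n grid (m.toNat * n.toNat + 2) 0 (pvCinit m n grid))

-- ===== PRECONDITION & SPEC =====
-- Pre_ excludes only inputs where Python A raises an IndexError: a positive m×n scan
-- area that the grid does not cover (fewer than m rows, or a scanned row shorter than n).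
def Pre_min_distance_sum (m : Int) (n : Int) (grid : List (List Int)) : Prop :=
  (0 < m ∧ 0 < n) → (m.toNat ≤ grid.length ∧ ∀ r ∈ grid.take m.toNat, n.toNat ≤ r.length)

instance (m : Int) (n : Int) (grid : List (List Int)) : Decidable (Pre_min_distance_sum m n grid) := by
  unfold Pre_min_distance_sum; infer_instance

def pvWitness_min_distance_sum : Int × Int × List (List Int) := (2, 3, [[0, 1, -1], [1, 1, 0]])

def Spec_min_distance_sum (m : Int) (n : Int) (grid : List (List Int)) (out : Int) : Prop := out = min_distance_sum_alt m n grid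
instance (m : Int) (n : Int) (grid : List (List Int)) (out : Int) : Decidable (Spec_min_distance_sum m n grid out) := by unfold Spec_min_distance_sum; infer_instance

-- ===== CLAIM (what is proved, stated in full; the proofs are below) =====
def Claim_equal_min_distance_sum : Prop := ∀ (m : Int) (n : Int) (grid : List (List Int)), Dom_min_distance_sum m n grid → Pre_min_distance_sum m n grid → Spec_min_distance_sum m n grid (min_distance_sum m n grid)

-- ===== LEMMAS AND PROOFS =====

-- proof-side intermediate object: the level-synchronous FRONTIER formulation of the same BFS
-- (A's queue is proved equal to it wave by wave; B's sweeps are proved equal to it level by level)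
def pvBstep (m n : Int) (grid : List (List Int)) (x y d : Int)
    (p : List (Int × Int) × PvDists) (dxy : Int × Int) : List (Int × Int) × PvDists :=
  let nx := x + dxy.1
  let ny := y + dxy.2
  if 0 ≤ nx ∧ nx < m ∧ 0 ≤ ny ∧ ny < n ∧ pvGcell grid nx ny ≠ -1 ∧ pvDget p.2 nx ny = none then
    (p.1 ++ [(nx, ny)], pvDset p.2 nx ny (d + 1))
  else p

def pvBcell (m n : Int) (grid : List (List Int)) (d : Int)
    (p : List (Int × Int) × PvDists) (c : Int × Int) : List (Int × Int) × PvDists :=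
  pvDirs.foldl (pvBstep m n grid c.1 c.2 d) p

def pvBwave (m n : Int) (grid : List (List Int)) (fr : List (Int × Int)) (d : Int) (D : PvDists) :
    List (Int × Int) × PvDists :=
  fr.foldl (pvBcell m n grid d) ([], D)

def pvBloop (m n : Int) (grid : List (List Int)) : Nat → List (Int × Int) → Int → PvDists → PvDists
  | 0, _, _, D => D
  | _ + 1, [], _, D => D
  | f + 1, c :: fr, d, D =>
      let p := pvBwave m n grid (c :: fr) d D
      pvBloop m n grid f p.1 (d + 1) p.2

def pvBinit (m n : Int) (grid : List (List Int)) : List (Int × Int) × PvDists :=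
  (PySem.List.pyRange 0 m 1).foldl (fun p i =>
    (PySem.List.pyRange 0 n 1).foldl (fun p j =>
      if pvGcell grid i j = 0 then (p.1 ++ [(i, j)], pvDset p.2 i j 0) else p) p)
    ([], List.replicate m.toNat (List.replicate n.toNat (none : Option Int)))

-- distance matrices of shape m×n
def PvShaped (m n : Int) (D : PvDists) : Prop :=
  D.length = m.toNat ∧ ∀ r ∈ D, r.length = n.toNat

-- every stored (finite) distance is ≤ b
def PvAllLe (D : PvDists) (b : Int) : Prop :=
  ∀ r ∈ D, ∀ o ∈ r, ∀ v : Int, o = some v → v ≤ b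

-- number of still-unreached (inf/None) cells
def pvKappa (D : PvDists) : Nat :=
  (D.map (fun r => r.countP (fun o => o.isNone))).sum

def pvTri (d : Int) (c : Int × Int) : Int × Int × Int := (c.1, c.2, d)

theorem pvAllLe_mono {D : PvDists} {b b' : Int} (h : PvAllLe D b) (hbb : b ≤ b') : PvAllLe D b' := by
  intro r hr o ho v hv
  exact le_trans (h r hr o ho v hv) hbb

theorem pvCountP_set_none (r : List (Option Int)) (b : Nat) (v : Int)
    (hb : b < r.length) (hn : r[b] = none) :
    (r.set b (some v)).countP (fun o => o.isNone) + 1 = r.countP (fun o => o.isNone) := by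
  induction r generalizing b with
  | nil => simp at hb
  | cons h t ih =>
    cases b with
    | zero =>
      simp only [List.getElem_cons_zero] at hn
      subst hn
      simp
    | succ b =>
      simp only [List.length_cons, Nat.add_lt_add_iff_right] at hb
      simp only [List.getElem_cons_succ] at hn
      simp only [List.set_cons_succ, List.countP_cons]
      have := ih b hb hn
      omega

theorem pvCountP_set_le (r : List (Option Int)) (b : Nat) (v : Int) :
    (r.set b (some v)).countP (fun o => o.isNone) ≤ r.countP (fun o => o.isNone) := by
  induction r generalizing b with
  | nil => simp
  | cons h t ih =>
    cases b with
    | zero =>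
      simp only [List.set_cons_zero, List.countP_cons, Option.isNone_some]
      simp
    | succ b =>
      simp only [List.set_cons_succ, List.countP_cons]
      have := ih b
      omega

theorem pvKappa_set (D : PvDists) (a : Nat) (r' : List (Option Int)) (ha : a < D.length) :
    pvKappa (D.set a r') + (D.getD a []).countP (fun o => o.isNone)
      = pvKappa D + r'.countP (fun o => o.isNone) := by
  induction D generalizing a with
  | nil => simp at ha
  | cons h t ih =>
    cases a with
    | zero => simp [pvKappa]; omega
    | succ a =>
      simp only [List.length_cons, Nat.add_lt_add_iff_right] at ha
      simp only [List.set_cons_succ, List.getD_cons_succ, pvKappa, List.map_cons, List.sum_cons]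
      have := ih a ha
      simp only [pvKappa] at this
      omega

theorem pvKappa_dset_le (D : PvDists) (i j : Int) (v : Int) :
    pvKappa (pvDset D i j v) ≤ pvKappa D := by
  unfold pvDset
  by_cases ha : i.toNat < D.length
  · have h1 := pvKappa_set D i.toNat ((D.getD i.toNat []).set j.toNat (some v)) ha
    have h2 := pvCountP_set_le (D.getD i.toNat []) j.toNat v
    omega
  · rw [List.set_eq_of_length_le (by omega)]

theorem pvKappa_dset_none (D : PvDists) (i j v : Int)
    (hi : i.toNat < D.length) (hj : j.toNat < (D.getD i.toNat []).length)
    (hn : pvDget D i j = none) :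
    pvKappa (pvDset D i j v) + 1 = pvKappa D := by
  unfold pvDset
  have h1 := pvKappa_set D i.toNat ((D.getD i.toNat []).set j.toNat (some v)) hi
  have hget : (D.getD i.toNat [])[j.toNat] = none := by
    have := List.getD_eq_getElem (D.getD i.toNat []) none hj
    unfold pvDget at hn
    rw [this] at hn
    exact hn
  have h2 := pvCountP_set_none (D.getD i.toNat []) j.toNat v hj hget
  omega

theorem pvShaped_dset (m n : Int) (D : PvDists) (i j v : Int) (h : PvShaped m n D) :
    PvShaped m n (pvDset D i j v) := by
  obtain ⟨hlen, hrow⟩ := h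
  unfold pvDset
  by_cases ha : i.toNat < D.length
  · refine ⟨by simpa using hlen, ?_⟩
    intro r hr
    rcases List.mem_or_eq_of_mem_set hr with hr' | hr'
    · exact hrow r hr'
    · subst hr'
      rw [List.length_set]
      have : D.getD i.toNat [] ∈ D := by
        rw [List.getD_eq_getElem D [] ha]
        exact List.getElem_mem ha
      exact hrow _ this
  · rw [List.set_eq_of_length_le (by omega)]
    exact ⟨hlen, hrow⟩

theorem pvAllLe_dset (D : PvDists) (b i j v : Int) (h : PvAllLe D b) (hv : v ≤ b) :
    PvAllLe (pvDset D i j v) b := by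
  unfold pvDset
  by_cases ha : i.toNat < D.length
  · intro r hr o ho w hw
    rcases List.mem_or_eq_of_mem_set hr with hr' | hr'
    · exact h r hr' o ho w hw
    · subst hr'
      rcases List.mem_or_eq_of_mem_set ho with ho' | ho'
      · have : D.getD i.toNat [] ∈ D := by
          rw [List.getD_eq_getElem D [] ha]
          exact List.getElem_mem ha
        exact h _ this o ho' w hw
      · subst ho'
        cases hw
        exact hv
  · rw [List.set_eq_of_length_le (by omega)]
    exact h

theorem pvDget_some_bound (D : PvDists) (b i j : Int) (v : Int)
    (h : PvAllLe D b) (hg : pvDget D i j = some v) : v ≤ b := by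
  unfold pvDget at hg
  by_cases ha : i.toNat < D.length
  · set r := D.getD i.toNat [] with hr
    have hrmem : r ∈ D := by
      rw [hr, List.getD_eq_getElem D [] ha]
      exact List.getElem_mem ha
    by_cases hb : j.toNat < r.length
    · rw [List.getD_eq_getElem r none hb] at hg
      exact h r hrmem _ (hg ▸ List.getElem_mem hb) v hg
    · rw [List.getD_eq_default r none (by omega)] at hg
      cases hg
  · rw [List.getD_eq_default D [] (by omega)] at hg
    simp at hg

-- a fold whose step only appends to its accumulator can be started from []
theorem pvFoldl_acc {α β : Type} (g : List α × PvDists → β → List α × PvDists)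
    (hg : ∀ (acc : List α) (D : PvDists) (c : β),
      g (acc, D) c = (acc ++ (g ([], D) c).1, (g ([], D) c).2)) :
    ∀ (ds : List β) (acc : List α) (D : PvDists),
    ds.foldl g (acc, D) = (acc ++ (ds.foldl g ([], D)).1, (ds.foldl g ([], D)).2) := by
  intro ds
  induction ds with
  | nil => intro acc D; simp
  | cons c ds ih =>
    intro acc D
    simp only [List.foldl_cons]
    calc List.foldl g (g (acc, D) c) ds
        = List.foldl g (acc ++ (g ([], D) c).1, (g ([], D) c).2) ds := by rw [hg]
      _ = ((acc ++ (g ([], D) c).1) ++ (List.foldl g ([], (g ([], D) c).2) ds).1,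
            (List.foldl g ([], (g ([], D) c).2) ds).2) := ih _ _
      _ = (acc ++ ((g ([], D) c).1 ++ (List.foldl g ([], (g ([], D) c).2) ds).1),
            (List.foldl g ([], (g ([], D) c).2) ds).2) := by rw [List.append_assoc]
      _ = (acc ++ (List.foldl g ((g ([], D) c).1, (g ([], D) c).2) ds).1,
            (List.foldl g ((g ([], D) c).1, (g ([], D) c).2) ds).2) := by
              rw [ih ((g ([], D) c).1) ((g ([], D) c).2)]
      _ = (acc ++ (List.foldl g (g ([], D) c) ds).1, (List.foldl g (g ([], D) c) ds).2) := by
              rw [Prod.mk.eta]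

theorem pvAstep1_acc (m n : Int) (grid : List (List Int)) (x y d : Int)
    (acc : List (Int × Int × Int)) (D : PvDists) (dxy : Int × Int) :
    pvAstep m n grid x y d (acc, D) dxy
      = (acc ++ (pvAstep m n grid x y d ([], D) dxy).1, (pvAstep m n grid x y d ([], D) dxy).2) := by
  simp only [pvAstep]
  split_ifs <;> simp

theorem pvBstep1_acc (m n : Int) (grid : List (List Int)) (x y d : Int)
    (acc : List (Int × Int)) (D : PvDists) (dxy : Int × Int) :
    pvBstep m n grid x y d (acc, D) dxy
      = (acc ++ (pvBstep m n grid x y d ([], D) dxy).1, (pvBstep m n grid x y d ([], D) dxy).2) := by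
  simp only [pvBstep]
  split_ifs <;> simp

theorem pvAstep_acc (m n : Int) (grid : List (List Int)) (x y d : Int)
    (ds : List (Int × Int)) (acc : List (Int × Int × Int)) (D : PvDists) :
    ds.foldl (pvAstep m n grid x y d) (acc, D)
      = (acc ++ (ds.foldl (pvAstep m n grid x y d) ([], D)).1,
         (ds.foldl (pvAstep m n grid x y d) ([], D)).2) :=
  pvFoldl_acc _ (pvAstep1_acc m n grid x y d) ds acc D

theorem pvBstep_acc (m n : Int) (grid : List (List Int)) (x y d : Int)
    (ds : List (Int × Int)) (acc : List (Int × Int)) (D : PvDists) :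
    ds.foldl (pvBstep m n grid x y d) (acc, D)
      = (acc ++ (ds.foldl (pvBstep m n grid x y d) ([], D)).1,
         (ds.foldl (pvBstep m n grid x y d) ([], D)).2) :=
  pvFoldl_acc _ (pvBstep1_acc m n grid x y d) ds acc D

-- one direction: A's relaxation test and B's None test make the same update
theorem pvStep1_rel (m n : Int) (grid : List (List Int)) (x y d : Int)
    (dxy : Int × Int) (D : PvDists)
    (hS : PvShaped m n D) (hL : PvAllLe D (d + 1)) :
    (pvAstep m n grid x y d ([], D) dxy
        = ((pvBstep m n grid x y d ([], D) dxy).1.map (pvTri (d + 1)),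
           (pvBstep m n grid x y d ([], D) dxy).2))
    ∧ PvShaped m n (pvBstep m n grid x y d ([], D) dxy).2
    ∧ PvAllLe (pvBstep m n grid x y d ([], D) dxy).2 (d + 1)
    ∧ pvKappa (pvBstep m n grid x y d ([], D) dxy).2
        + (pvBstep m n grid x y d ([], D) dxy).1.length = pvKappa D := by
  simp only [pvAstep, pvBstep]
  by_cases hb : 0 ≤ x + dxy.1 ∧ x + dxy.1 < m ∧ 0 ≤ y + dxy.2 ∧ y + dxy.2 < n ∧
      pvGcell grid (x + dxy.1) (y + dxy.2) ≠ -1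
  · cases hg : pvDget D (x + dxy.1) (y + dxy.2) with
    | none =>
      rw [if_pos hb, if_pos (show pvLtInf (d + 1) none = true from rfl),
        if_pos (by exact ⟨hb.1, hb.2.1, hb.2.2.1, hb.2.2.2.1, hb.2.2.2.2, rfl⟩)]
      have hi : (x + dxy.1).toNat < D.length := by
        rw [hS.1]; omega
      have hrow : D.getD (x + dxy.1).toNat [] ∈ D := by
        rw [List.getD_eq_getElem D [] hi]
        exact List.getElem_mem hi
      have hj : (y + dxy.2).toNat < (D.getD (x + dxy.1).toNat []).length := by
        rw [hS.2 _ hrow]; omega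
      refine ⟨by simp [pvTri], pvShaped_dset m n D _ _ _ hS,
        pvAllLe_dset D (d + 1) _ _ _ hL le_rfl, ?_⟩
      have := pvKappa_dset_none D (x + dxy.1) (y + dxy.2) (d + 1) hi hj hg
      simp only [List.nil_append, List.length_cons, List.length_nil]
      omega
    | some v =>
      have hv : v ≤ d + 1 := pvDget_some_bound D (d + 1) _ _ v hL hg
      rw [if_pos hb, if_neg (show ¬ pvLtInf (d + 1) (some v) = true by simp [pvLtInf]; omega),
        if_neg (by simp)]
      exact ⟨by simp, hS, hL, by simp⟩
  · rw [if_neg hb,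
      if_neg (by exact fun hc => hb ⟨hc.1, hc.2.1, hc.2.2.1, hc.2.2.2.1, hc.2.2.2.2.1⟩)]
    exact ⟨by simp, hS, hL, by simp⟩

-- one cell's direction fold: A (relaxation test) and B (None test) do the same thing
theorem pvDirs_rel (m n : Int) (grid : List (List Int)) (x y d : Int)
    (ds : List (Int × Int)) (D : PvDists)
    (hS : PvShaped m n D) (hL : PvAllLe D (d + 1)) :
    (ds.foldl (pvAstep m n grid x y d) ([], D)
        = ((ds.foldl (pvBstep m n grid x y d) ([], D)).1.map (pvTri (d + 1)),
           (ds.foldl (pvBstep m n grid x y d) ([], D)).2))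
    ∧ PvShaped m n (ds.foldl (pvBstep m n grid x y d) ([], D)).2
    ∧ PvAllLe (ds.foldl (pvBstep m n grid x y d) ([], D)).2 (d + 1)
    ∧ pvKappa (ds.foldl (pvBstep m n grid x y d) ([], D)).2
        + (ds.foldl (pvBstep m n grid x y d) ([], D)).1.length = pvKappa D := by
  induction ds generalizing D with
  | nil => exact ⟨by simp, hS, hL, by simp⟩
  | cons dxy ds ih =>
    obtain ⟨he, hS1, hL1, hk1⟩ := pvStep1_rel m n grid x y d dxy D hS hL
    obtain ⟨ihe, ihS, ihL, ihk⟩ := ih (pvBstep m n grid x y d ([], D) dxy).2 hS1 hL1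
    have hA : (dxy :: ds).foldl (pvAstep m n grid x y d) ([], D)
        = ((pvBstep m n grid x y d ([], D) dxy).1.map (pvTri (d + 1))
             ++ (ds.foldl (pvAstep m n grid x y d)
                  ([], (pvBstep m n grid x y d ([], D) dxy).2)).1,
           (ds.foldl (pvAstep m n grid x y d)
                  ([], (pvBstep m n grid x y d ([], D) dxy).2)).2) := by
      simp only [List.foldl_cons]
      rw [he]
      exact pvAstep_acc m n grid x y d ds _ _
    have hB : (dxy :: ds).foldl (pvBstep m n grid x y d) ([], D)
        = ((pvBstep m n grid x y d ([], D) dxy).1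
             ++ (ds.foldl (pvBstep m n grid x y d)
                  ([], (pvBstep m n grid x y d ([], D) dxy).2)).1,
           (ds.foldl (pvBstep m n grid x y d)
                  ([], (pvBstep m n grid x y d ([], D) dxy).2)).2) := by
      simp only [List.foldl_cons]
      exact pvBstep_acc m n grid x y d ds _ _
    rw [hA, hB]
    refine ⟨?_, by simpa using ihS, by simpa using ihL, ?_⟩
    · rw [ihe]
      simp
    · simp only [List.length_append]
      omega

theorem pvAloop_nil (m n : Int) (grid : List (List Int)) (f : Nat) (D : PvDists) :
    pvAloop m n grid f [] D = D := by
  cases f <;> rfl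

theorem pvBloop_nil (m n : Int) (grid : List (List Int)) (f : Nat) (d : Int) (D : PvDists) :
    pvBloop m n grid f [] d D = D := by
  cases f <;> rfl

-- processing one whole frontier: A pops its cells one by one, the frontier form folds a wave
theorem pvWave_rel (m n : Int) (grid : List (List Int)) (d : Int) :
    ∀ (fr q₂ : List (Int × Int)) (D : PvDists) (fA : Nat),
    PvShaped m n D → PvAllLe D (d + 1) → fr.length + q₂.length + pvKappa D ≤ fA →
    (pvAloop m n grid fA (fr.map (pvTri d) ++ q₂.map (pvTri (d + 1))) D
        = pvAloop m n grid (fA - fr.length)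
            ((fr.foldl (pvBcell m n grid d) (q₂, D)).1.map (pvTri (d + 1)))
            (fr.foldl (pvBcell m n grid d) (q₂, D)).2)
    ∧ PvShaped m n (fr.foldl (pvBcell m n grid d) (q₂, D)).2
    ∧ PvAllLe (fr.foldl (pvBcell m n grid d) (q₂, D)).2 (d + 1)
    ∧ pvKappa (fr.foldl (pvBcell m n grid d) (q₂, D)).2
        + (fr.foldl (pvBcell m n grid d) (q₂, D)).1.length = pvKappa D + q₂.length := by
  intro fr
  induction fr with
  | nil =>
    intro q₂ D fA hS hL hle
    exact ⟨by simp, hS, hL, by simp⟩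
  | cons c fr' ih =>
    intro q₂ D fA hS hL hle
    cases fA with
    | zero => simp at hle
    | succ f =>
      obtain ⟨hd, hS1, hL1, hk1⟩ := pvDirs_rel m n grid c.1 c.2 d pvDirs D hS hL
      have hcell : pvBcell m n grid d (q₂, D) c
          = (q₂ ++ (pvDirs.foldl (pvBstep m n grid c.1 c.2 d) ([], D)).1,
             (pvDirs.foldl (pvBstep m n grid c.1 c.2 d) ([], D)).2) := by
        unfold pvBcell
        exact pvBstep_acc m n grid c.1 c.2 d pvDirs _ _
      have hstep : pvAloop m n grid (f + 1)
            ((c :: fr').map (pvTri d) ++ q₂.map (pvTri (d + 1))) D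
          = pvAloop m n grid f
              (fr'.map (pvTri d)
                ++ (q₂ ++ (pvDirs.foldl (pvBstep m n grid c.1 c.2 d) ([], D)).1).map
                     (pvTri (d + 1)))
              (pvDirs.foldl (pvBstep m n grid c.1 c.2 d) ([], D)).2 := by
        simp only [List.map_cons, List.cons_append, pvTri, pvAloop]
        rw [pvAstep_acc m n grid c.1 c.2 d pvDirs _ _, hd]
        simp [List.append_assoc]
      obtain ⟨ihe, ihS, ihL, ihk⟩ := ih (q₂ ++ (pvDirs.foldl (pvBstep m n grid c.1 c.2 d) ([], D)).1)
        (pvDirs.foldl (pvBstep m n grid c.1 c.2 d) ([], D)).2 f hS1 hL1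
        (by simp only [List.length_cons, List.length_append] at hle ⊢; omega)
      have hfold : (c :: fr').foldl (pvBcell m n grid d) (q₂, D)
          = fr'.foldl (pvBcell m n grid d)
              (q₂ ++ (pvDirs.foldl (pvBstep m n grid c.1 c.2 d) ([], D)).1,
               (pvDirs.foldl (pvBstep m n grid c.1 c.2 d) ([], D)).2) := by
        simp only [List.foldl_cons, hcell]
      rw [hfold, hstep, ihe]
      have hlen : f + 1 - (c :: fr').length = f - fr'.length := by
        simp only [List.length_cons]
        omega
      rw [hlen]
      refine ⟨rfl, ihS, ihL, ?_⟩
      simp only [List.length_append] at ihk ⊢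
      omega

-- A's loop equals the frontier loop on the same final distance matrix
theorem pvMain (m n : Int) (grid : List (List Int)) :
    ∀ (fB : Nat) (fr : List (Int × Int)) (d : Int) (D : PvDists) (fA : Nat),
    PvShaped m n D → PvAllLe D (d + 1) → fr.length + pvKappa D ≤ fA → 1 + pvKappa D ≤ fB →
    pvAloop m n grid fA (fr.map (pvTri d)) D = pvBloop m n grid fB fr d D := by
  intro fB
  induction fB with
  | zero =>
    intro fr d D fA hS hL hfa hfb
    omega
  | succ f ih =>
    intro fr d D fA hS hL hfa hfb
    cases fr with
    | nil => simp [pvAloop_nil, pvBloop_nil]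
    | cons c fr' =>
      obtain ⟨hw, hS1, hL1, hk1⟩ := pvWave_rel m n grid d (c :: fr') [] D fA hS hL
        (by simpa using hfa)
      have hq : (c :: fr').map (pvTri d)
          = (c :: fr').map (pvTri d) ++ ([] : List (Int × Int)).map (pvTri (d + 1)) := by simp
      rw [hq, hw]
      have hbl : pvBloop m n grid (f + 1) (c :: fr') d D
          = pvBloop m n grid f ((c :: fr').foldl (pvBcell m n grid d) ([], D)).1 (d + 1)
              ((c :: fr').foldl (pvBcell m n grid d) ([], D)).2 := by
        simp only [pvBloop, pvBwave]
      rw [hbl]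
      cases hW1 : ((c :: fr').foldl (pvBcell m n grid d) ([], D)).1 with
      | nil =>
        rw [hW1] at *
        simp [pvAloop_nil, pvBloop_nil]
      | cons w ws =>
        rw [← hW1]
        exact ih _ (d + 1) _ (fA - (c :: fr').length) hS1
          (pvAllLe_mono hL1 (by omega))
          (by simp only [List.length_nil] at hk1; simp only [List.length_cons] at hfa ⊢; omega)
          (by rw [hW1] at hk1; simp only [List.length_nil, List.length_cons] at hk1; omega)

-- initial scan, inner loop over one row (generic over the index lists)
theorem pvInitInner_rel (m n : Int) (grid : List (List Int)) (i : Int) :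
    ∀ (J : List Int) (accB : List (Int × Int)) (D : PvDists),
    PvShaped m n D → PvAllLe D 0 →
    (J.foldl (fun p j => if pvGcell grid i j = 0 then (p.1 ++ [(i, j, (0 : Int))], pvDset p.2 i j 0) else p)
        (accB.map (pvTri 0), D)
      = ((J.foldl (fun p j => if pvGcell grid i j = 0 then (p.1 ++ [(i, j)], pvDset p.2 i j 0) else p) (accB, D)).1.map (pvTri 0),
         (J.foldl (fun p j => if pvGcell grid i j = 0 then (p.1 ++ [(i, j)], pvDset p.2 i j 0) else p) (accB, D)).2))
    ∧ PvShaped m n (J.foldl (fun p j => if pvGcell grid i j = 0 then (p.1 ++ [(i, j)], pvDset p.2 i j 0) else p) (accB, D)).2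
    ∧ PvAllLe (J.foldl (fun p j => if pvGcell grid i j = 0 then (p.1 ++ [(i, j)], pvDset p.2 i j 0) else p) (accB, D)).2 0
    ∧ pvKappa (J.foldl (fun p j => if pvGcell grid i j = 0 then (p.1 ++ [(i, j)], pvDset p.2 i j 0) else p) (accB, D)).2 ≤ pvKappa D
    ∧ (J.foldl (fun p j => if pvGcell grid i j = 0 then (p.1 ++ [(i, j)], pvDset p.2 i j 0) else p) (accB, D)).1.length
        ≤ accB.length + J.length := by
  intro J
  induction J with
  | nil =>
    intro accB D hS hL
    exact ⟨by simp, hS, hL, le_rfl, by simp⟩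
  | cons j J ih =>
    intro accB D hS hL
    by_cases hc : pvGcell grid i j = 0
    · have hstep :
          (fun (p : List (Int × Int × Int) × PvDists) j =>
              if pvGcell grid i j = 0 then (p.1 ++ [(i, j, (0 : Int))], pvDset p.2 i j 0) else p)
            (accB.map (pvTri 0), D) j
          = ((accB ++ [(i, j)]).map (pvTri 0), pvDset D i j 0) := by
        simp [hc, pvTri]
      obtain ⟨ihe, ihS, ihL, ihk, ihl⟩ := ih (accB ++ [(i, j)]) (pvDset D i j 0)
        (pvShaped_dset m n D i j 0 hS) (pvAllLe_dset D 0 i j 0 hL le_rfl)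
      simp only [List.foldl_cons, hstep, if_pos hc]
      refine ⟨ihe, ihS, ihL, le_trans ihk (pvKappa_dset_le D i j 0), ?_⟩
      simp only [List.length_append, List.length_cons, List.length_nil] at ihl ⊢
      omega
    · obtain ⟨ihe, ihS, ihL, ihk, ihl⟩ := ih accB D hS hL
      simp only [List.foldl_cons, if_neg hc]
      refine ⟨ihe, ihS, ihL, ihk, ?_⟩
      simp only [List.length_cons] at ihl ⊢
      omega

-- initial scan, outer loop over the rows (generic over the index lists)
theorem pvInitOuter_rel (m n : Int) (grid : List (List Int)) (J : List Int) :
    ∀ (I : List Int) (accB : List (Int × Int)) (D : PvDists),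
    PvShaped m n D → PvAllLe D 0 →
    (I.foldl (fun p i => J.foldl (fun p j => if pvGcell grid i j = 0 then (p.1 ++ [(i, j, (0 : Int))], pvDset p.2 i j 0) else p) p)
        (accB.map (pvTri 0), D)
      = ((I.foldl (fun p i => J.foldl (fun p j => if pvGcell grid i j = 0 then (p.1 ++ [(i, j)], pvDset p.2 i j 0) else p) p) (accB, D)).1.map (pvTri 0),
         (I.foldl (fun p i => J.foldl (fun p j => if pvGcell grid i j = 0 then (p.1 ++ [(i, j)], pvDset p.2 i j 0) else p) p) (accB, D)).2))
    ∧ PvShaped m n (I.foldl (fun p i => J.foldl (fun p j => if pvGcell grid i j = 0 then (p.1 ++ [(i, j)], pvDset p.2 i j 0) else p) p) (accB, D)).2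
    ∧ PvAllLe (I.foldl (fun p i => J.foldl (fun p j => if pvGcell grid i j = 0 then (p.1 ++ [(i, j)], pvDset p.2 i j 0) else p) p) (accB, D)).2 0
    ∧ pvKappa (I.foldl (fun p i => J.foldl (fun p j => if pvGcell grid i j = 0 then (p.1 ++ [(i, j)], pvDset p.2 i j 0) else p) p) (accB, D)).2 ≤ pvKappa D
    ∧ (I.foldl (fun p i => J.foldl (fun p j => if pvGcell grid i j = 0 then (p.1 ++ [(i, j)], pvDset p.2 i j 0) else p) p) (accB, D)).1.length
        ≤ accB.length + I.length * J.length := by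
  intro I
  induction I with
  | nil =>
    intro accB D hS hL
    exact ⟨by simp, hS, hL, le_rfl, by simp⟩
  | cons i I ih =>
    intro accB D hS hL
    obtain ⟨he1, hS1, hL1, hk1, hl1⟩ := pvInitInner_rel m n grid i J accB D hS hL
    simp only [List.foldl_cons]
    rw [he1]
    obtain ⟨ihe, ihS, ihL, ihk, ihl⟩ := ih
      (J.foldl (fun p j => if pvGcell grid i j = 0 then (p.1 ++ [(i, j)], pvDset p.2 i j 0) else p) (accB, D)).1
      (J.foldl (fun p j => if pvGcell grid i j = 0 then (p.1 ++ [(i, j)], pvDset p.2 i j 0) else p) (accB, D)).2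
      hS1 hL1
    have hpair : ((J.foldl (fun p j => if pvGcell grid i j = 0 then (p.1 ++ [(i, j)], pvDset p.2 i j 0) else p) (accB, D)).1,
                  (J.foldl (fun p j => if pvGcell grid i j = 0 then (p.1 ++ [(i, j)], pvDset p.2 i j 0) else p) (accB, D)).2)
        = J.foldl (fun p j => if pvGcell grid i j = 0 then (p.1 ++ [(i, j)], pvDset p.2 i j 0) else p) (accB, D) :=
      Prod.mk.eta
    rw [hpair] at ihe ihS ihL ihk ihl
    refine ⟨ihe, ihS, ihL, le_trans ihk hk1, ?_⟩
    simp only [List.length_cons] at ihl ⊢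
    calc _ ≤ _ := ihl
    _ ≤ (accB.length + J.length) + I.length * J.length := by omega
    _ = accB.length + (I.length + 1) * J.length := by ring

-- the two initial scans agree (queue = frontier as triples, same matrix), with the size facts
theorem pvInit_rel (m n : Int) (grid : List (List Int)) :
    (pvAinit m n grid).1 = (pvBinit m n grid).1.map (pvTri 0)
    ∧ (pvAinit m n grid).2 = (pvBinit m n grid).2
    ∧ PvShaped m n (pvBinit m n grid).2
    ∧ PvAllLe (pvBinit m n grid).2 0
    ∧ pvKappa (pvBinit m n grid).2 ≤ m.toNat * n.toNat
    ∧ (pvBinit m n grid).1.length ≤ m.toNat * n.toNat := by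
  have hS0 : PvShaped m n (List.replicate m.toNat (List.replicate n.toNat (none : Option Int))) := by
    refine ⟨by simp, ?_⟩
    intro r hr
    rw [List.eq_of_mem_replicate hr]
    simp
  have hL0 : PvAllLe (List.replicate m.toNat (List.replicate n.toNat (none : Option Int))) 0 := by
    intro r hr o ho v hv
    rw [List.eq_of_mem_replicate hr] at ho
    rw [List.eq_of_mem_replicate ho] at hv
    cases hv
  have hk0 : pvKappa (List.replicate m.toNat (List.replicate n.toNat (none : Option Int)))
      = m.toNat * n.toNat := by
    unfold pvKappa
    rw [List.map_replicate, List.sum_replicate]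
    have : (List.replicate n.toNat (none : Option Int)).countP (fun o => o.isNone) = n.toNat := by
      rw [List.countP_eq_length.mpr]
      · simp
      · intro a ha
        rw [List.eq_of_mem_replicate ha]
        rfl
    rw [this, smul_eq_mul]
  obtain ⟨he, hS, hL, hk, hl⟩ := pvInitOuter_rel m n grid (PySem.List.pyRange 0 n 1)
    (PySem.List.pyRange 0 m 1) [] (List.replicate m.toNat (List.replicate n.toNat (none : Option Int)))
    hS0 hL0
  have hlen : (PySem.List.pyRange 0 m 1).length * (PySem.List.pyRange 0 n 1).length
      = m.toNat * n.toNat := by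
    rw [PySem.List.length_pyRange_one, PySem.List.length_pyRange_one]
    simp
  unfold pvAinit pvBinit
  simp only [List.map_nil] at he
  refine ⟨by rw [he], by rw [he], hS, hL, by omega, ?_⟩
  simp only [List.length_nil, Nat.zero_add] at hl
  omega

-- cells, bounds, and the qualifying predicates of one BFS level
def pvInb (m n : Int) (z : Int × Int) : Prop := 0 ≤ z.1 ∧ z.1 < m ∧ 0 ≤ z.2 ∧ z.2 < n

-- "z is a cell newly reached from frontier list fr": unreached, passable, adjacent to fr
def pvAdjD (m n : Int) (grid : List (List Int)) (ds : List (Int × Int)) (c : Int × Int)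
    (D : PvDists) (z : Int × Int) : Prop :=
  pvInb m n z ∧ pvGcell grid z.1 z.2 ≠ -1 ∧ pvDget D z.1 z.2 = none ∧
    ∃ e ∈ ds, z = (c.1 + e.1, c.2 + e.2)

def pvAdjF (m n : Int) (grid : List (List Int)) (fr : List (Int × Int))
    (D : PvDists) (z : Int × Int) : Prop :=
  pvInb m n z ∧ pvGcell grid z.1 z.2 ≠ -1 ∧ pvDget D z.1 z.2 = none ∧
    ∃ c ∈ fr, ∃ e ∈ pvDirs, z = (c.1 + e.1, c.2 + e.2)

-- "z is newly reached at level d" as B's sweep tests it: some in-bounds neighbour at level d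
def pvQual (m n : Int) (grid : List (List Int)) (d : Int) (D : PvDists) (z : Int × Int) : Prop :=
  pvInb m n z ∧ pvGcell grid z.1 z.2 ≠ -1 ∧ pvDget D z.1 z.2 = none ∧
    ∃ e ∈ pvDirs, pvInb m n (z.1 + e.1, z.2 + e.2) ∧ pvDget D (z.1 + e.1) (z.2 + e.2) = some d

-- pointwise bound on the stored distances
def PvLe' (D : PvDists) (b : Int) : Prop :=
  ∀ x y v : Int, 0 ≤ x → 0 ≤ y → pvDget D x y = some v → v ≤ b

theorem pvDget_dset_self (m n : Int) (D : PvDists) (i j v : Int)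
    (hS : PvShaped m n D) (h : pvInb m n (i, j)) :
    pvDget (pvDset D i j v) i j = some v := by
  obtain ⟨h1, h2, h3, h4⟩ := h
  unfold pvDget pvDset
  have hi : i.toNat < D.length := by rw [hS.1]; omega
  have hrow : D.getD i.toNat [] ∈ D := by
    rw [List.getD_eq_getElem D [] hi]; exact List.getElem_mem hi
  have hj : j.toNat < (D.getD i.toNat []).length := by rw [hS.2 _ hrow]; omega
  rw [List.getD_eq_getElem _ [] (by simpa using hi)]
  rw [List.getElem_set_self (by simpa using hi)]
  rw [List.getD_eq_getElem _ none (by simpa using hj)]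
  rw [List.getElem_set_self (by simpa using hj)]

theorem pvDget_dset_ne (D : PvDists) (i j x y v : Int)
    (hi : 0 ≤ i) (hj : 0 ≤ j) (hx : 0 ≤ x) (hy : 0 ≤ y) (hne : (x, y) ≠ (i, j)) :
    pvDget (pvDset D i j v) x y = pvDget D x y := by
  unfold pvDget pvDset
  by_cases hxi : x = i
  · subst hxi
    have hyj : y.toNat ≠ j.toNat := by
      intro hc
      exact hne (by rw [Prod.mk.injEq]; omega)
    by_cases ha : x.toNat < D.length
    · rw [List.getD_eq_getElem _ [] (by simpa using ha),
        List.getElem_set_self (by simpa using ha), List.getD_eq_getElem D [] ha]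
      rcases lt_or_ge y.toNat (D[x.toNat]).length with hb | hb
      · rw [List.getD_eq_getElem _ none (by simpa using hb),
          List.getElem_set_ne (Ne.symm hyj), List.getD_eq_getElem _ none hb]
      · rw [List.getD_eq_default _ none (by simpa using hb),
          List.getD_eq_default _ none hb]
    · rw [List.set_eq_of_length_le (by omega)]
  · have hxi' : x.toNat ≠ i.toNat := by omega
    congr 1
    rcases lt_or_ge x.toNat D.length with ha | ha
    · rw [List.getD_eq_getElem _ [] (by simpa using ha),
        List.getElem_set_ne (Ne.symm hxi'), List.getD_eq_getElem D [] ha]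
    · rw [List.getD_eq_default _ [] (by simpa using ha), List.getD_eq_default _ [] ha]

theorem pvExt (m n : Int) (D E : PvDists) (hD : PvShaped m n D) (hE : PvShaped m n E)
    (h : ∀ x y : Int, pvInb m n (x, y) → pvDget D x y = pvDget E x y) : D = E := by
  apply List.ext_getElem (by rw [hD.1, hE.1])
  intro a h1 h2
  apply List.ext_getElem
  · rw [hD.2 _ (List.getElem_mem h1), hE.2 _ (List.getElem_mem h2)]
  · intro b hb1 hb2
    have ham : a < m.toNat := by rw [← hD.1]; exact h1
    have hbn : b < n.toNat := by
      rw [← hD.2 _ (List.getElem_mem h1)]; exact hb1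
    have hinb : pvInb m n ((a : Int), (b : Int)) := by
      refine ⟨by positivity, by omega, by positivity, by omega⟩
    have hh := h a b hinb
    unfold pvDget at hh
    simp only [Int.toNat_natCast] at hh
    rw [List.getD_eq_getElem D [] h1, List.getD_eq_getElem E [] h2,
      List.getD_eq_getElem _ none hb1, List.getD_eq_getElem _ none hb2] at hh
    exact hh

-- marking the neighbours of ONE frontier cell: the direction fold patches exactly the
-- unreached passable in-bounds cells adjacent to c, all with value d+1
theorem pvC1 (m n : Int) (grid : List (List Int)) (c : Int × Int) (d : Int) :
    ∀ (ds : List (Int × Int)), ds.Nodup →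
    ∀ (q : List (Int × Int)) (D : PvDists), PvShaped m n D →
    PvShaped m n (ds.foldl (pvBstep m n grid c.1 c.2 d) (q, D)).2
    ∧ (∀ z, pvAdjD m n grid ds c D z →
        pvDget (ds.foldl (pvBstep m n grid c.1 c.2 d) (q, D)).2 z.1 z.2 = some (d + 1))
    ∧ (∀ x y : Int, 0 ≤ x → 0 ≤ y → ¬ pvAdjD m n grid ds c D (x, y) →
        pvDget (ds.foldl (pvBstep m n grid c.1 c.2 d) (q, D)).2 x y = pvDget D x y)
    ∧ (∀ z, z ∈ (ds.foldl (pvBstep m n grid c.1 c.2 d) (q, D)).1 ↔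
        z ∈ q ∨ pvAdjD m n grid ds c D z) := by
  intro ds
  induction ds with
  | nil =>
    intro _ q D hS
    refine ⟨hS, ?_, ?_, ?_⟩
    · intro z hz
      rcases hz.2.2.2 with ⟨e, he, _⟩
      simp at he
    · intro x y _ _ _; rfl
    · intro z; simp [pvAdjD]
  | cons e ds ih =>
    intro hnd q D hS
    have hnd' : ds.Nodup := hnd.of_cons
    have hens : e ∉ ds := by
      intro hc; exact (List.nodup_cons.mp hnd).1 hc
    set nx := c.1 + e.1 with hnx
    set ny := c.2 + e.2 with hny
    by_cases hc : 0 ≤ nx ∧ nx < m ∧ 0 ≤ ny ∧ ny < n ∧ pvGcell grid nx ny ≠ -1 ∧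
        pvDget D nx ny = none
    · -- the target cell of e is patched
      have hstep : pvBstep m n grid c.1 c.2 d (q, D) e
          = (q ++ [(nx, ny)], pvDset D nx ny (d + 1)) := by
        simp only [pvBstep]
        rw [if_pos hc]
      have hT : pvAdjD m n grid (e :: ds) c D (nx, ny) :=
        ⟨⟨hc.1, hc.2.1, hc.2.2.1, hc.2.2.2.1⟩, hc.2.2.2.2.1, hc.2.2.2.2.2,
          ⟨e, List.mem_cons_self, rfl⟩⟩
      have hS1 : PvShaped m n (pvDset D nx ny (d + 1)) := pvShaped_dset m n D nx ny (d + 1) hS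
      have hgetT : pvDget (pvDset D nx ny (d + 1)) nx ny = some (d + 1) :=
        pvDget_dset_self m n D nx ny (d + 1) hS ⟨hc.1, hc.2.1, hc.2.2.1, hc.2.2.2.1⟩
      have hgetO : ∀ x y : Int, 0 ≤ x → 0 ≤ y → (x, y) ≠ (nx, ny) →
          pvDget (pvDset D nx ny (d + 1)) x y = pvDget D x y := by
        intro x y hx hy hne
        exact pvDget_dset_ne D nx ny x y (d + 1) hc.1 hc.2.2.1 hx hy hne
      -- the remaining targets are distinct from (nx, ny)
      have htne : ∀ z, pvAdjD m n grid ds c D z → z ≠ (nx, ny) := by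
        intro z hz hzz
        rcases hz.2.2.2 with ⟨e', he', hze'⟩
        have : e' = e := by
          rw [hzz] at hze'
          have h1 : c.1 + e.1 = c.1 + e'.1 := congrArg Prod.fst hze'
          have h2 : c.2 + e.2 = c.2 + e'.2 := congrArg Prod.snd hze'
          cases e; cases e'
          simp at h1 h2 ⊢
          omega
        rw [this] at he'
        exact hens he'
      have hAdjEq : ∀ z, pvAdjD m n grid ds c (pvDset D nx ny (d + 1)) z
          ↔ pvAdjD m n grid ds c D z := by
        intro z
        constructor
        · rintro ⟨hzi, hzp, hzn, hex⟩
          have hzne : z ≠ (nx, ny) := by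
            intro hzz
            rw [hzz] at hzn
            rw [hgetT] at hzn
            cases hzn
          refine ⟨hzi, hzp, ?_, hex⟩
          rw [← hgetO z.1 z.2 hzi.1 hzi.2.2.1 (by simpa using hzne)]
          exact hzn
        · intro hz
          have hzne : z ≠ (nx, ny) := htne z hz
          refine ⟨hz.1, hz.2.1, ?_, hz.2.2.2⟩
          rw [hgetO z.1 z.2 hz.1.1 hz.1.2.2.1 (by simpa using hzne)]
          exact hz.2.2.1
      obtain ⟨ihS, iha, ihb, ihc2⟩ := ih hnd' (q ++ [(nx, ny)]) (pvDset D nx ny (d + 1)) hS1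
      have hfold : (e :: ds).foldl (pvBstep m n grid c.1 c.2 d) (q, D)
          = ds.foldl (pvBstep m n grid c.1 c.2 d) (q ++ [(nx, ny)], pvDset D nx ny (d + 1)) := by
        simp only [List.foldl_cons, hstep]
      rw [hfold]
      refine ⟨ihS, ?_, ?_, ?_⟩
      · -- patched cells carry d+1
        intro z hz
        rcases hz.2.2.2 with ⟨e', he', hze'⟩
        rcases List.mem_cons.mp he' with rfl | he'd
        · -- z is e's target
          have hzT : z = (nx, ny) := hze'
          rw [hzT]
          have hnA : ¬ pvAdjD m n grid ds c (pvDset D nx ny (d + 1)) (nx, ny) := by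
            intro hA
            have hA' := hA.2.2.1
            rw [hgetT] at hA'
            cases hA'
          rw [ihb nx ny hc.1 hc.2.2.1 hnA]
          exact hgetT
        · have hzA : pvAdjD m n grid ds c D z := ⟨hz.1, hz.2.1, hz.2.2.1, ⟨e', he'd, hze'⟩⟩
          exact iha z ((hAdjEq z).mpr hzA)
      · intro x y hx hy hn
        have hn1 : ¬ pvAdjD m n grid ds c D (x, y) := by
          intro hA
          exact hn ⟨hA.1, hA.2.1, hA.2.2.1,
            by rcases hA.2.2.2 with ⟨e', he', hp⟩; exact ⟨e', List.mem_cons_of_mem _ he', hp⟩⟩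
        have hne : (x, y) ≠ (nx, ny) := by
          intro hxy
          have : pvAdjD m n grid (e :: ds) c D (x, y) := by rw [hxy]; exact hT
          exact hn this
        rw [ihb x y hx hy (fun hA => hn1 ((hAdjEq (x, y)).mp hA))]
        exact hgetO x y hx hy hne
      · intro z
        rw [ihc2 z, hAdjEq z]
        simp only [List.mem_append, List.mem_singleton]
        constructor
        · rintro ((hq | hT') | hA)
          · exact Or.inl hq
          · exact Or.inr (hT' ▸ hT)
          · exact Or.inr ⟨hA.1, hA.2.1, hA.2.2.1,
              by rcases hA.2.2.2 with ⟨e', he', hp⟩; exact ⟨e', List.mem_cons_of_mem _ he', hp⟩⟩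
        · rintro (hq | hA)
          · exact Or.inl (Or.inl hq)
          · rcases hA.2.2.2 with ⟨e', he', hp⟩
            rcases List.mem_cons.mp he' with rfl | he'd
            · exact Or.inl (Or.inr hp)
            · exact Or.inr ⟨hA.1, hA.2.1, hA.2.2.1, ⟨e', he'd, hp⟩⟩
    · -- the step does nothing, and no cell is e-adjacent qualifying
      have hstep : pvBstep m n grid c.1 c.2 d (q, D) e = (q, D) := by
        simp only [pvBstep]
        rw [if_neg hc]
      have hAdjE : ∀ z, pvAdjD m n grid (e :: ds) c D z ↔ pvAdjD m n grid ds c D z := by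
        intro z
        constructor
        · rintro ⟨hzi, hzp, hzn, e', he', hze'⟩
          rcases List.mem_cons.mp he' with rfl | he'd
          · exfalso
            apply hc
            rw [hze'] at hzi hzp hzn
            exact ⟨hzi.1, hzi.2.1, hzi.2.2.1, hzi.2.2.2, hzp, hzn⟩
          · exact ⟨hzi, hzp, hzn, ⟨e', he'd, hze'⟩⟩
        · rintro ⟨hzi, hzp, hzn, e', he', hze'⟩
          exact ⟨hzi, hzp, hzn, ⟨e', List.mem_cons_of_mem _ he', hze'⟩⟩
      obtain ⟨ihS, iha, ihb, ihc2⟩ := ih hnd' q D hS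
      have hfold : (e :: ds).foldl (pvBstep m n grid c.1 c.2 d) (q, D)
          = ds.foldl (pvBstep m n grid c.1 c.2 d) (q, D) := by
        simp only [List.foldl_cons, hstep]
      rw [hfold]
      refine ⟨ihS, ?_, ?_, ?_⟩
      · intro z hz; exact iha z ((hAdjE z).mp hz)
      · intro x y hx hy hn; exact ihb x y hx hy (fun hA => hn ((hAdjE (x, y)).mpr hA))
      · intro z; rw [ihc2 z, hAdjE z]

theorem pvDirs_nodup : pvDirs.Nodup := by decide

-- one whole frontier wave patches exactly the unreached passable cells adjacent to the
-- frontier, all with value d+1, and collects exactly those cells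
theorem pvWchar (m n : Int) (grid : List (List Int)) (d : Int) :
    ∀ (fr : List (Int × Int)) (q : List (Int × Int)) (D : PvDists), PvShaped m n D →
    PvShaped m n (fr.foldl (pvBcell m n grid d) (q, D)).2
    ∧ (∀ z, pvAdjF m n grid fr D z →
        pvDget (fr.foldl (pvBcell m n grid d) (q, D)).2 z.1 z.2 = some (d + 1))
    ∧ (∀ x y : Int, 0 ≤ x → 0 ≤ y → ¬ pvAdjF m n grid fr D (x, y) →
        pvDget (fr.foldl (pvBcell m n grid d) (q, D)).2 x y = pvDget D x y)
    ∧ (∀ z, z ∈ (fr.foldl (pvBcell m n grid d) (q, D)).1 ↔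
        z ∈ q ∨ pvAdjF m n grid fr D z) := by
  intro fr
  induction fr with
  | nil =>
    intro q D hS
    refine ⟨hS, ?_, ?_, ?_⟩
    · intro z hz
      rcases hz.2.2.2 with ⟨c, hc, _⟩
      simp at hc
    · intro x y _ _ _; rfl
    · intro z; simp [pvAdjF]
  | cons c fr ih =>
    intro q D hS
    obtain ⟨h1S, h1a, h1b, h1c⟩ := pvC1 m n grid c d pvDirs pvDirs_nodup q D hS
    set P1 := pvDirs.foldl (pvBstep m n grid c.1 c.2 d) (q, D) with hP1
    have hfold : (c :: fr).foldl (pvBcell m n grid d) (q, D)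
        = fr.foldl (pvBcell m n grid d) (P1.1, P1.2) := by
      simp only [List.foldl_cons, pvBcell, hP1, Prod.mk.eta]
    have hAdjEq : ∀ z, pvAdjF m n grid fr P1.2 z
        ↔ (pvAdjF m n grid fr D z ∧ ¬ pvAdjD m n grid pvDirs c D z) := by
      intro z
      constructor
      · rintro ⟨hzi, hzp, hzn, hex⟩
        have hnA : ¬ pvAdjD m n grid pvDirs c D z := by
          intro hA
          rw [h1a z hA] at hzn
          cases hzn
        refine ⟨⟨hzi, hzp, ?_, hex⟩, hnA⟩
        rw [← h1b z.1 z.2 hzi.1 hzi.2.2.1 (by simpa using hnA)]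
        exact hzn
      · rintro ⟨⟨hzi, hzp, hzn, hex⟩, hnA⟩
        refine ⟨hzi, hzp, ?_, hex⟩
        rw [h1b z.1 z.2 hzi.1 hzi.2.2.1 (by simpa using hnA)]
        exact hzn
    have hAdjCons : ∀ z, pvAdjF m n grid (c :: fr) D z
        ↔ (pvAdjD m n grid pvDirs c D z ∨ pvAdjF m n grid fr D z) := by
      intro z
      constructor
      · rintro ⟨hzi, hzp, hzn, c', hc', e, he, hz⟩
        rcases List.mem_cons.mp hc' with rfl | hc'd
        · exact Or.inl ⟨hzi, hzp, hzn, ⟨e, he, hz⟩⟩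
        · exact Or.inr ⟨hzi, hzp, hzn, ⟨c', hc'd, e, he, hz⟩⟩
      · rintro (⟨hzi, hzp, hzn, e, he, hz⟩ | ⟨hzi, hzp, hzn, c', hc', e, he, hz⟩)
        · exact ⟨hzi, hzp, hzn, ⟨c, List.mem_cons_self, e, he, hz⟩⟩
        · exact ⟨hzi, hzp, hzn, ⟨c', List.mem_cons_of_mem _ hc', e, he, hz⟩⟩
    obtain ⟨ihS, iha, ihb, ihc2⟩ := ih P1.1 P1.2 h1S
    rw [hfold]
    refine ⟨ihS, ?_, ?_, ?_⟩
    · intro z hz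
      rcases (hAdjCons z).mp hz with hA | hF
      · have hP1z : pvDget P1.2 z.1 z.2 = some (d + 1) := h1a z hA
        have hnF : ¬ pvAdjF m n grid fr P1.2 z := by
          intro hF'
          have hF2 := hF'.2.2.1
          rw [hP1z] at hF2
          cases hF2
        rw [ihb z.1 z.2 hz.1.1 hz.1.2.2.1 (by simpa using hnF)]
        exact hP1z
      · by_cases hA : pvAdjD m n grid pvDirs c D z
        · have hP1z : pvDget P1.2 z.1 z.2 = some (d + 1) := h1a z hA
          have hnF : ¬ pvAdjF m n grid fr P1.2 z := by
            intro hF'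
            have hF2 := hF'.2.2.1
            rw [hP1z] at hF2
            cases hF2
          rw [ihb z.1 z.2 hz.1.1 hz.1.2.2.1 (by simpa using hnF)]
          exact hP1z
        · exact iha z ((hAdjEq z).mpr ⟨hF, hA⟩)
    · intro x y hx hy hn
      rw [hAdjCons (x, y)] at hn
      push Not at hn
      have hnF : ¬ pvAdjF m n grid fr P1.2 (x, y) := by
        intro hF'
        exact hn.2 ((hAdjEq (x, y)).mp hF').1
      rw [ihb x y hx hy hnF]
      exact h1b x y hx hy hn.1
    · intro z
      rw [ihc2 z, h1c z, hAdjEq z, hAdjCons z]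
      by_cases hA : pvAdjD m n grid pvDirs c D z <;> by_cases hF : pvAdjF m n grid fr D z <;>
        simp [hA, hF]

-- the row-major list of all grid cells, as B's nested sweep loops visit them
def pvCells (m n : Int) : List (Int × Int) :=
  (PySem.List.pyRange 0 m 1).flatMap (fun i => (PySem.List.pyRange 0 n 1).map (fun j => (i, j)))

theorem pvCells_mem (m n : Int) (z : Int × Int) : z ∈ pvCells m n ↔ pvInb m n z := by
  unfold pvCells pvInb
  simp only [List.mem_flatMap, List.mem_map, PySem.List.mem_pyRange_one]
  constructor
  · rintro ⟨i, ⟨hi0, him⟩, j, ⟨hj0, hjn⟩, rfl⟩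
    exact ⟨hi0, him, hj0, hjn⟩
  · rintro ⟨h1, h2, h3, h4⟩
    exact ⟨z.1, ⟨h1, h2⟩, z.2, ⟨h3, h4⟩, rfl⟩

theorem pvCells_nodup (m n : Int) : (pvCells m n).Nodup := by
  unfold pvCells
  have h : ∀ (I : List Int), I.Nodup →
      (I.flatMap (fun i => (PySem.List.pyRange 0 n 1).map (fun j => (i, j)))).Nodup := by
    intro I
    induction I with
    | nil => intro _; simp
    | cons i I ih =>
      intro hnd
      simp only [List.flatMap_cons]
      apply List.Nodup.append
      · exact List.Nodup.map (fun a b hab => congrArg Prod.snd hab) (PySem.List.nodup_pyRange_one _ _)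
      · exact ih hnd.of_cons
      · intro z hz1 hz2
        simp only [List.mem_map] at hz1
        rcases hz1 with ⟨j, _, rfl⟩
        simp only [List.mem_flatMap, List.mem_map] at hz2
        rcases hz2 with ⟨i', hi', j', _, hij⟩
        have : i' = i := congrArg Prod.fst hij
        subst this
        exact (List.nodup_cons.mp hnd).1 hi'
  exact h _ (PySem.List.nodup_pyRange_one _ _)

-- the nested sweep loops are the fold over the row-major cell list
theorem pvFoldl_cells {σ : Type} (n : Int) (g : σ → Int → Int → σ) :
    ∀ (I : List Int) (s : σ),
    I.foldl (fun s i => (PySem.List.pyRange 0 n 1).foldl (fun s j => g s i j) s) s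
      = (I.flatMap (fun i => (PySem.List.pyRange 0 n 1).map (fun j => (i, j)))).foldl
          (fun s z => g s z.1 z.2) s := by
  intro I
  induction I with
  | nil => intro s; rfl
  | cons i I ih =>
    intro s
    simp only [List.foldl_cons, List.flatMap_cons, List.foldl_append, List.foldl_map]
    exact ih _

-- one sweep over a list of distinct in-bounds cells: relative to the matrix D at the start
-- of the sweep, exactly the qualifying visited cells get patched to d+1, and the changed
-- flag records whether any cell qualified (D0 is the evolving in-place matrix)
theorem pvS1 (m n : Int) (grid : List (List Int)) (d : Int) (D : PvDists) :
    ∀ (L : List (Int × Int)), L.Nodup → (∀ z ∈ L, pvInb m n z) →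
    ∀ (chg : Bool) (D0 : PvDists), PvShaped m n D0 →
    (∀ z ∈ L, pvDget D0 z.1 z.2 = pvDget D z.1 z.2) →
    (∀ x y : Int, 0 ≤ x → 0 ≤ y →
      pvDget D0 x y = pvDget D x y ∨ (pvDget D x y = none ∧ pvDget D0 x y = some (d + 1))) →
    PvShaped m n (L.foldl (fun s z => pvCcell m n grid d s z.1 z.2) (chg, D0)).2
    ∧ (∀ z ∈ L, pvQual m n grid d D z →
        pvDget (L.foldl (fun s z => pvCcell m n grid d s z.1 z.2) (chg, D0)).2 z.1 z.2
          = some (d + 1))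
    ∧ (∀ x y : Int, 0 ≤ x → 0 ≤ y → ¬ ((x, y) ∈ L ∧ pvQual m n grid d D (x, y)) →
        pvDget (L.foldl (fun s z => pvCcell m n grid d s z.1 z.2) (chg, D0)).2 x y
          = pvDget D0 x y)
    ∧ ((L.foldl (fun s z => pvCcell m n grid d s z.1 z.2) (chg, D0)).1 = true ↔
        chg = true ∨ ∃ z ∈ L, pvQual m n grid d D z) := by
  intro L
  induction L with
  | nil =>
    intro _ _ chg D0 hS0 _ _
    refine ⟨hS0, by simp, fun x y _ _ _ => rfl, by simp⟩
  | cons z L ih =>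
    intro hnd hInb chg D0 hS0 hU hP
    have hzI : pvInb m n z := hInb z List.mem_cons_self
    have hzU : pvDget D0 z.1 z.2 = pvDget D z.1 z.2 := hU z List.mem_cons_self
    -- the sweep's test on the evolving matrix equals pvQual on the start-of-sweep matrix
    have hcond : (pvDget D0 z.1 z.2 = none ∧ pvGcell grid z.1 z.2 ≠ -1 ∧
        (pvDirs.any (fun e =>
          decide (0 ≤ z.1 + e.1 ∧ z.1 + e.1 < m ∧ 0 ≤ z.2 + e.2 ∧ z.2 + e.2 < n) &&
          (pvDget D0 (z.1 + e.1) (z.2 + e.2) == some d))) = true)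
        ↔ pvQual m n grid d D z := by
      unfold pvQual
      rw [hzU]
      constructor
      · rintro ⟨ha, hb, hc⟩
        refine ⟨hzI, hb, ha, ?_⟩
        rw [List.any_eq_true] at hc
        rcases hc with ⟨e, he, hee⟩
        rw [Bool.and_eq_true, decide_eq_true_iff, beq_iff_eq] at hee
        refine ⟨e, he, ⟨hee.1.1, hee.1.2.1, hee.1.2.2.1, hee.1.2.2.2⟩, ?_⟩
        rcases hP (z.1 + e.1) (z.2 + e.2) (by omega) (by omega) with heq | ⟨_, hpt⟩
        · rw [← heq]; exact hee.2
        · rw [hpt] at hee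
          have := hee.2
          exfalso
          have hdd : d + 1 = d := by injection this
          omega
      · rintro ⟨_, hb, ha, e, he, hbnd, hval⟩
        refine ⟨ha, hb, ?_⟩
        rw [List.any_eq_true]
        refine ⟨e, he, ?_⟩
        rw [Bool.and_eq_true, decide_eq_true_iff, beq_iff_eq]
        refine ⟨⟨hbnd.1, hbnd.2.1, hbnd.2.2.1, hbnd.2.2.2⟩, ?_⟩
        rcases hP (z.1 + e.1) (z.2 + e.2) (by exact hbnd.1) (by exact hbnd.2.2.1) with heq | ⟨hno, _⟩
        · rw [heq]; exact hval
        · rw [hno] at hval; cases hval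
    have hfold : (z :: L).foldl (fun s z => pvCcell m n grid d s z.1 z.2) (chg, D0)
        = L.foldl (fun s z => pvCcell m n grid d s z.1 z.2)
            (pvCcell m n grid d (chg, D0) z.1 z.2) := rfl
    by_cases hq : pvQual m n grid d D z
    · have hstep : pvCcell m n grid d (chg, D0) z.1 z.2
          = (true, pvDset D0 z.1 z.2 (d + 1)) := by
        unfold pvCcell
        rw [if_pos (hcond.mpr hq)]
      set D1 := pvDset D0 z.1 z.2 (d + 1) with hD1
      have hS1 : PvShaped m n D1 := pvShaped_dset m n D0 z.1 z.2 (d + 1) hS0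
      have hgT : pvDget D1 z.1 z.2 = some (d + 1) := by
        rw [hD1]
        have := pvDget_dset_self m n D0 z.1 z.2 (d + 1) hS0 (by rwa [Prod.mk.eta])
        exact this
      have hgO : ∀ x y : Int, 0 ≤ x → 0 ≤ y → (x, y) ≠ (z.1, z.2) →
          pvDget D1 x y = pvDget D0 x y := by
        intro x y hx hy hne
        exact pvDget_dset_ne D0 z.1 z.2 x y (d + 1) hzI.1 hzI.2.2.1 hx hy hne
      have hU1 : ∀ w ∈ L, pvDget D1 w.1 w.2 = pvDget D w.1 w.2 := by
        intro w hw
        have hwz : w ≠ z := by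
          intro hc; subst hc; exact (List.nodup_cons.mp hnd).1 hw
        rw [hgO w.1 w.2 (hInb w (List.mem_cons_of_mem _ hw)).1
          (hInb w (List.mem_cons_of_mem _ hw)).2.2.1
          (by simpa [Prod.ext_iff] using hwz)]
        exact hU w (List.mem_cons_of_mem _ hw)
      have hP1 : ∀ x y : Int, 0 ≤ x → 0 ≤ y →
          pvDget D1 x y = pvDget D x y ∨ (pvDget D x y = none ∧ pvDget D1 x y = some (d + 1)) := by
        intro x y hx hy
        by_cases hxy : (x, y) = (z.1, z.2)
        · right
          have hx1 : x = z.1 := congrArg Prod.fst hxy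
          have hy1 : y = z.2 := congrArg Prod.snd hxy
          subst hx1; subst hy1
          exact ⟨hq.2.2.1, hgT⟩
        · rw [hgO x y hx hy hxy]
          exact hP x y hx hy
      obtain ⟨ihS, iha, ihb, ihc2⟩ := ih hnd.of_cons (fun w hw => hInb w (List.mem_cons_of_mem _ hw))
        true D1 hS1 hU1 hP1
      rw [hfold, hstep]
      refine ⟨ihS, ?_, ?_, ?_⟩
      · intro w hw hwq
        rcases List.mem_cons.mp hw with rfl | hwL
        · have hwnL : ¬ ((w.1, w.2) ∈ L ∧ pvQual m n grid d D (w.1, w.2)) := by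
            rintro ⟨hmem, _⟩
            rw [Prod.mk.eta] at hmem
            exact (List.nodup_cons.mp hnd).1 hmem
          rw [ihb w.1 w.2 hzI.1 hzI.2.2.1 hwnL]
          exact hgT
        · exact iha w hwL hwq
      · intro x y hx hy hn
        have hnL : ¬ ((x, y) ∈ L ∧ pvQual m n grid d D (x, y)) := by
          rintro ⟨hmem, hqq⟩
          exact hn ⟨List.mem_cons_of_mem _ hmem, hqq⟩
        rw [ihb x y hx hy hnL]
        apply hgO x y hx hy
        intro hxy
        apply hn
        rw [hxy, Prod.mk.eta]
        exact ⟨List.mem_cons_self, hq⟩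
      · rw [ihc2]
        constructor
        · intro _; exact Or.inr ⟨z, List.mem_cons_self, hq⟩
        · intro _; exact Or.inl rfl
    · have hstep : pvCcell m n grid d (chg, D0) z.1 z.2 = (chg, D0) := by
        unfold pvCcell
        rw [if_neg (fun hc => hq (hcond.mp hc))]
      obtain ⟨ihS, iha, ihb, ihc2⟩ := ih hnd.of_cons (fun w hw => hInb w (List.mem_cons_of_mem _ hw))
        chg D0 hS0 (fun w hw => hU w (List.mem_cons_of_mem _ hw)) hP
      rw [hfold, hstep]
      refine ⟨ihS, ?_, ?_, ?_⟩
      · intro w hw hwq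
        rcases List.mem_cons.mp hw with rfl | hwL
        · exact absurd hwq hq
        · exact iha w hwL hwq
      · intro x y hx hy hn
        exact ihb x y hx hy (fun ⟨hmem, hqq⟩ => hn ⟨List.mem_cons_of_mem _ hmem, hqq⟩)
      · rw [ihc2]
        constructor
        · rintro (h | ⟨w, hw, hwq⟩)
          · exact Or.inl h
          · exact Or.inr ⟨w, List.mem_cons_of_mem _ hw, hwq⟩
        · rintro (h | ⟨w, hw, hwq⟩)
          · exact Or.inl h
          · rcases List.mem_cons.mp hw with rfl | hwL
            · exact absurd hwq hq
            · exact Or.inr ⟨w, hwL, hwq⟩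

-- one whole-grid sweep, characterized against its start matrix
theorem pvSweepChar (m n : Int) (grid : List (List Int)) (d : Int) (D : PvDists)
    (hS : PvShaped m n D) :
    PvShaped m n (pvSweep m n grid d D).2
    ∧ (∀ z, pvQual m n grid d D z →
        pvDget (pvSweep m n grid d D).2 z.1 z.2 = some (d + 1))
    ∧ (∀ x y : Int, 0 ≤ x → 0 ≤ y → ¬ pvQual m n grid d D (x, y) →
        pvDget (pvSweep m n grid d D).2 x y = pvDget D x y)
    ∧ ((pvSweep m n grid d D).1 = true ↔ ∃ z, pvQual m n grid d D z) := by
  have hfold : pvSweep m n grid d D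
      = (pvCells m n).foldl (fun s z => pvCcell m n grid d s z.1 z.2) (false, D) := by
    unfold pvSweep pvCells
    exact pvFoldl_cells n (fun s i j => pvCcell m n grid d s i j) _ _
  obtain ⟨ha, hb, hc, hd⟩ := pvS1 m n grid d D (pvCells m n) (pvCells_nodup m n)
    (fun z hz => (pvCells_mem m n z).mp hz) false D hS (fun _ _ => rfl)
    (fun x y _ _ => Or.inl rfl)
  rw [hfold]
  refine ⟨ha, ?_, ?_, ?_⟩
  · intro z hz
    exact hb z ((pvCells_mem m n z).mpr hz.1) hz
  · intro x y hx hy hn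
    exact hc x y hx hy (fun hh => hn hh.2)
  · rw [hd]
    simp only [Bool.false_eq_true, false_or]
    constructor
    · rintro ⟨z, _, hq⟩; exact ⟨z, hq⟩
    · rintro ⟨z, hq⟩; exact ⟨z, (pvCells_mem m n z).mpr hq.1, hq⟩

-- B's pull test ("some neighbour carries level d") = A's push reach ("adjacent to the
-- frontier"), because the direction set is closed under negation
theorem pvQual_iff_adjF (m n : Int) (grid : List (List Int)) (d : Int) (D : PvDists)
    (fr : List (Int × Int))
    (hfr : ∀ c ∈ fr, pvInb m n c)
    (hinv : ∀ z, pvInb m n z → (pvDget D z.1 z.2 = some d ↔ z ∈ fr)) :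
    ∀ z, pvQual m n grid d D z ↔ pvAdjF m n grid fr D z := by
  have hneg : ∀ e ∈ pvDirs, ((-e.1, -e.2) : Int × Int) ∈ pvDirs := by decide
  intro z
  constructor
  · rintro ⟨hzi, hzp, hzn, e, he, hbnd, hval⟩
    refine ⟨hzi, hzp, hzn, ?_⟩
    refine ⟨(z.1 + e.1, z.2 + e.2), (hinv _ hbnd).mp hval, (-e.1, -e.2), hneg e he, ?_⟩
    rw [Prod.mk.injEq]
    constructor <;> omega
  · rintro ⟨hzi, hzp, hzn, c, hc, e, he, hz⟩
    refine ⟨hzi, hzp, hzn, (-e.1, -e.2), hneg e he, ?_⟩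
    have h1 : z.1 = c.1 + e.1 := congrArg Prod.fst hz
    have h2 : z.2 = c.2 + e.2 := congrArg Prod.snd hz
    have hcc : (z.1 + -e.1, z.2 + -e.2) = c := by
      rw [Prod.ext_iff]
      constructor <;> simp <;> omega
    constructor
    · rw [hcc]; exact hfr c hc
    · have := (hinv c (hfr c hc)).mpr hc
      calc pvDget D (z.1 + -e.1) (z.2 + -e.2)
          = pvDget D c.1 c.2 := by rw [← hcc]
        _ = some d := this

-- the frontier loop and B's sweep loop compute the same matrix, level by level
theorem pvLoopEq (m n : Int) (grid : List (List Int)) :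
    ∀ (f : Nat) (fr : List (Int × Int)) (d : Int) (D : PvDists),
    PvShaped m n D → PvLe' D d →
    (∀ c ∈ fr, pvInb m n c) →
    (∀ z, pvInb m n z → (pvDget D z.1 z.2 = some d ↔ z ∈ fr)) →
    pvBloop m n grid f fr d D = pvCloop m n grid f d D := by
  intro f
  induction f with
  | zero =>
    intro fr d D _ _ _ _
    cases fr <;> rfl
  | succ f ih =>
    intro fr d D hS hLe hfr hinv
    have hQA := pvQual_iff_adjF m n grid d D fr hfr hinv
    obtain ⟨hSS, hSa, hSb, hSc⟩ := pvSweepChar m n grid d D hS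
    obtain ⟨hWS, hWa, hWb, hWc⟩ := pvWchar m n grid d fr [] D hS
    set W := fr.foldl (pvBcell m n grid d) ([], D) with hW
    have hMeq : (pvSweep m n grid d D).2 = W.2 := by
      apply pvExt m n _ _ hSS hWS
      intro x y hinb
      by_cases hA : pvAdjF m n grid fr D (x, y)
      · rw [hSa (x, y) ((hQA (x, y)).mpr hA), hWa (x, y) hA]
      · rw [hSb x y hinb.1 hinb.2.2.1 (fun hq => hA ((hQA (x, y)).mp hq)),
          hWb x y hinb.1 hinb.2.2.1 hA]
    have hCun : pvCloop m n grid (f + 1) d D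
        = if (pvSweep m n grid d D).1 then pvCloop m n grid f (d + 1) (pvSweep m n grid d D).2
          else (pvSweep m n grid d D).2 := rfl
    by_cases hex : ∃ z, pvQual m n grid d D z
    · have hflag : (pvSweep m n grid d D).1 = true := hSc.mpr hex
      rw [hCun, hflag, if_pos rfl, hMeq]
      cases hfr0 : fr with
      | nil =>
        exfalso
        rcases hex with ⟨z, hz⟩
        rcases ((hQA z).mp hz).2.2.2 with ⟨c, hc, _⟩
        rw [hfr0] at hc
        simp at hc
      | cons c fr' =>
        rw [← hfr0]
        have hBun : pvBloop m n grid (f + 1) fr d D = pvBloop m n grid f W.1 (d + 1) W.2 := by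
          rw [hfr0]
          simp only [pvBloop, pvBwave, hW, hfr0]
        rw [hBun]
        apply ih
        · exact hWS
        · intro x y v hx hy hg
          by_cases hA : pvAdjF m n grid fr D (x, y)
          · rw [hWa (x, y) hA] at hg
            injection hg with hg'
            omega
          · rw [hWb x y hx hy hA] at hg
            have := hLe x y v hx hy hg
            omega
        · intro w hw
          rcases (hWc w).mp hw with h0 | hA
          · simp at h0
          · exact hA.1
        · intro z hzi
          constructor
          · intro hg
            by_cases hA : pvAdjF m n grid fr D z
            · exact (hWc z).mpr (Or.inr hA)
            · rw [hWb z.1 z.2 hzi.1 hzi.2.2.1 (by simpa using hA)] at hg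
              have := hLe z.1 z.2 (d + 1) hzi.1 hzi.2.2.1 hg
              omega
          · intro hmem
            rcases (hWc z).mp hmem with h0 | hA
            · simp at h0
            · exact hWa z hA
    · have hflag : (pvSweep m n grid d D).1 = false := by
        cases hfl : (pvSweep m n grid d D).1
        · rfl
        · exact absurd (hSc.mp hfl) hex
      rw [hCun, hflag, if_neg (by simp), hMeq]
      have hWnil : W.1 = [] := by
        rw [List.eq_nil_iff_forall_not_mem]
        intro w hw
        rcases (hWc w).mp hw with h0 | hA
        · simp at h0
        · exact hex ⟨w, (hQA w).mpr hA⟩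
      cases hfr0 : fr with
      | nil =>
        have hW2 : W.2 = D := by
          rw [hW, hfr0]
          rfl
        rw [hW2, pvBloop_nil]
      | cons c fr' =>
        rw [← hfr0]
        have hBun : pvBloop m n grid (f + 1) fr d D = pvBloop m n grid f W.1 (d + 1) W.2 := by
          rw [hfr0]
          simp only [pvBloop, pvBwave, hW, hfr0]
        rw [hBun, hWnil, pvBloop_nil]

-- the base all-None matrix reads none everywhere
theorem pvRep_none (a b : Nat) (x y : Int) :
    pvDget (List.replicate a (List.replicate b (none : Option Int))) x y = none := by
  unfold pvDget
  rcases lt_or_ge x.toNat a with ha | ha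
  · rw [List.getD_eq_getElem _ [] (by simpa using ha), List.getElem_replicate]
    rcases lt_or_ge y.toNat b with hb | hb
    · rw [List.getD_eq_getElem _ none (by simpa using hb), List.getElem_replicate]
    · rw [List.getD_eq_default _ none (by simpa using hb)]
  · rw [List.getD_eq_default _ [] (by simpa using ha)]
    simp

-- the frontier-form initial scan, inner loop: which cells get value 0, which pairs are queued
theorem pvInitC_inner (m n : Int) (grid : List (List Int)) (i : Int)
    (hi : 0 ≤ i ∧ i < m) :
    ∀ (J : List Int), (∀ j ∈ J, 0 ≤ j ∧ j < n) →
    ∀ (acc : List (Int × Int)) (D : PvDists), PvShaped m n D →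
    PvShaped m n (J.foldl (fun p j => if pvGcell grid i j = 0 then (p.1 ++ [(i, j)], pvDset p.2 i j 0) else p) (acc, D)).2
    ∧ (∀ x y : Int, 0 ≤ x → 0 ≤ y → ¬ (x = i ∧ y ∈ J ∧ pvGcell grid x y = 0) →
        pvDget (J.foldl (fun p j => if pvGcell grid i j = 0 then (p.1 ++ [(i, j)], pvDset p.2 i j 0) else p) (acc, D)).2 x y = pvDget D x y)
    ∧ (∀ y ∈ J, pvGcell grid i y = 0 →
        pvDget (J.foldl (fun p j => if pvGcell grid i j = 0 then (p.1 ++ [(i, j)], pvDset p.2 i j 0) else p) (acc, D)).2 i y = some 0)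
    ∧ (∀ z : Int × Int, z ∈ (J.foldl (fun p j => if pvGcell grid i j = 0 then (p.1 ++ [(i, j)], pvDset p.2 i j 0) else p) (acc, D)).1 ↔
        z ∈ acc ∨ (z.1 = i ∧ z.2 ∈ J ∧ pvGcell grid i z.2 = 0)) := by
  intro J
  induction J with
  | nil =>
    intro _ acc D hS
    refine ⟨hS, fun x y _ _ _ => rfl, by simp, ?_⟩
    intro z; simp
  | cons j J ih =>
    intro hJ acc D hS
    have hj : 0 ≤ j ∧ j < n := hJ j List.mem_cons_self
    have hJ' : ∀ j' ∈ J, 0 ≤ j' ∧ j' < n := fun j' hj' => hJ j' (List.mem_cons_of_mem _ hj')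
    by_cases hg : pvGcell grid i j = 0
    · have hstep : (fun (p : List (Int × Int) × PvDists) j =>
          if pvGcell grid i j = 0 then (p.1 ++ [(i, j)], pvDset p.2 i j 0) else p) (acc, D) j
          = (acc ++ [(i, j)], pvDset D i j 0) := by
        simp [hg]
      have hS1 : PvShaped m n (pvDset D i j 0) := pvShaped_dset m n D i j 0 hS
      have hgT : pvDget (pvDset D i j 0) i j = some 0 :=
        pvDget_dset_self m n D i j 0 hS ⟨hi.1, hi.2, hj.1, hj.2⟩
      have hgO : ∀ x y : Int, 0 ≤ x → 0 ≤ y → (x, y) ≠ (i, j) →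
          pvDget (pvDset D i j 0) x y = pvDget D x y :=
        fun x y hx hy hne => pvDget_dset_ne D i j x y 0 hi.1 hj.1 hx hy hne
      obtain ⟨ihS, ihb, iha, ihc⟩ := ih hJ' (acc ++ [(i, j)]) (pvDset D i j 0) hS1
      simp only [List.foldl_cons, hstep]
      refine ⟨ihS, ?_, ?_, ?_⟩
      · intro x y hx hy hn
        have hn' : ¬ (x = i ∧ y ∈ J ∧ pvGcell grid x y = 0) := by
          rintro ⟨h1, h2, h3⟩
          exact hn ⟨h1, List.mem_cons_of_mem _ h2, h3⟩
        rw [ihb x y hx hy hn']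
        apply hgO x y hx hy
        intro hxy
        rw [Prod.mk.injEq] at hxy
        apply hn
        refine ⟨hxy.1, ?_, ?_⟩
        · rw [hxy.2]; exact List.mem_cons_self
        · rw [hxy.1, hxy.2]; exact hg
      · intro y hy hgy
        rcases List.mem_cons.mp hy with rfl | hyJ
        · by_cases hyJ' : y ∈ J
          · exact iha y hyJ' hgy
          · have hn : ¬ (i = i ∧ y ∈ J ∧ pvGcell grid i y = 0) := by
              rintro ⟨_, h2, _⟩; exact hyJ' h2
            rw [ihb i y hi.1 hj.1 hn]
            exact hgT
        · exact iha y hyJ hgy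
      · intro z
        rw [ihc z]
        simp only [List.mem_append, List.mem_cons, List.not_mem_nil, or_false]
        constructor
        · rintro ((hq | hz) | ⟨h1, h2, h3⟩)
          · exact Or.inl hq
          · have hz1 : z.1 = i := by rw [hz]
            have hz2 : z.2 = j := by rw [hz]
            refine Or.inr ⟨hz1, Or.inl hz2, ?_⟩
            rw [hz2]; exact hg
          · exact Or.inr ⟨h1, Or.inr h2, h3⟩
        · rintro (hq | ⟨h1, (h2 | h2), h3⟩)
          · exact Or.inl (Or.inl hq)
          · refine Or.inl (Or.inr ?_)
            rw [Prod.ext_iff]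
            exact ⟨h1, h2⟩
          · exact Or.inr ⟨h1, h2, h3⟩
    · have hstep : (fun (p : List (Int × Int) × PvDists) j =>
          if pvGcell grid i j = 0 then (p.1 ++ [(i, j)], pvDset p.2 i j 0) else p) (acc, D) j
          = (acc, D) := by
        simp [hg]
      obtain ⟨ihS, ihb, iha, ihc⟩ := ih hJ' acc D hS
      simp only [List.foldl_cons, hstep]
      refine ⟨ihS, ?_, ?_, ?_⟩
      · intro x y hx hy hn
        apply ihb x y hx hy
        rintro ⟨h1, h2, h3⟩
        exact hn ⟨h1, List.mem_cons_of_mem _ h2, h3⟩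
      · intro y hy hgy
        rcases List.mem_cons.mp hy with rfl | hyJ
        · exact absurd hgy hg
        · exact iha y hyJ hgy
      · intro z
        rw [ihc z]
        constructor
        · rintro (hq | ⟨h1, h2, h3⟩)
          · exact Or.inl hq
          · exact Or.inr ⟨h1, List.mem_cons_of_mem _ h2, h3⟩
        · rintro (hq | ⟨h1, h2, h3⟩)
          · exact Or.inl hq
          · rcases List.mem_cons.mp h2 with rfl | h2'
            · exact absurd h3 hg
            · exact Or.inr ⟨h1, h2', h3⟩

-- the frontier-form initial scan, outer loop
theorem pvInitC_outer (m n : Int) (grid : List (List Int)) (J : List Int)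
    (hJ : ∀ j ∈ J, 0 ≤ j ∧ j < n) :
    ∀ (I : List Int), (∀ i ∈ I, 0 ≤ i ∧ i < m) →
    ∀ (acc : List (Int × Int)) (D : PvDists), PvShaped m n D →
    PvShaped m n (I.foldl (fun p i => J.foldl (fun p j => if pvGcell grid i j = 0 then (p.1 ++ [(i, j)], pvDset p.2 i j 0) else p) p) (acc, D)).2
    ∧ (∀ x y : Int, 0 ≤ x → 0 ≤ y → ¬ (x ∈ I ∧ y ∈ J ∧ pvGcell grid x y = 0) →
        pvDget (I.foldl (fun p i => J.foldl (fun p j => if pvGcell grid i j = 0 then (p.1 ++ [(i, j)], pvDset p.2 i j 0) else p) p) (acc, D)).2 x y = pvDget D x y)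
    ∧ (∀ x ∈ I, ∀ y ∈ J, pvGcell grid x y = 0 →
        pvDget (I.foldl (fun p i => J.foldl (fun p j => if pvGcell grid i j = 0 then (p.1 ++ [(i, j)], pvDset p.2 i j 0) else p) p) (acc, D)).2 x y = some 0)
    ∧ (∀ z : Int × Int, z ∈ (I.foldl (fun p i => J.foldl (fun p j => if pvGcell grid i j = 0 then (p.1 ++ [(i, j)], pvDset p.2 i j 0) else p) p) (acc, D)).1 ↔
        z ∈ acc ∨ (z.1 ∈ I ∧ z.2 ∈ J ∧ pvGcell grid z.1 z.2 = 0)) := by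
  intro I
  induction I with
  | nil =>
    intro _ acc D hS
    refine ⟨hS, fun x y _ _ _ => rfl, by simp, ?_⟩
    intro z; simp
  | cons i I ih =>
    intro hI acc D hS
    have hi : 0 ≤ i ∧ i < m := hI i List.mem_cons_self
    have hI' : ∀ i' ∈ I, 0 ≤ i' ∧ i' < m := fun i' hi' => hI i' (List.mem_cons_of_mem _ hi')
    obtain ⟨h1S, h1b, h1a, h1c⟩ := pvInitC_inner m n grid i hi J hJ acc D hS
    set P1 := J.foldl (fun p j => if pvGcell grid i j = 0 then (p.1 ++ [(i, j)], pvDset p.2 i j 0) else p) (acc, D) with hP1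
    obtain ⟨ihS, ihb, iha, ihc⟩ := ih hI' P1.1 P1.2 h1S
    have hfold : (i :: I).foldl (fun p i => J.foldl (fun p j => if pvGcell grid i j = 0 then (p.1 ++ [(i, j)], pvDset p.2 i j 0) else p) p) (acc, D)
        = I.foldl (fun p i => J.foldl (fun p j => if pvGcell grid i j = 0 then (p.1 ++ [(i, j)], pvDset p.2 i j 0) else p) p) (P1.1, P1.2) := by
      simp only [List.foldl_cons, hP1, Prod.mk.eta]
    rw [hfold]
    refine ⟨ihS, ?_, ?_, ?_⟩
    · intro x y hx hy hn
      have hn1 : ¬ (x ∈ I ∧ y ∈ J ∧ pvGcell grid x y = 0) := by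
        rintro ⟨h1, h2, h3⟩
        exact hn ⟨List.mem_cons_of_mem _ h1, h2, h3⟩
      have hn2 : ¬ (x = i ∧ y ∈ J ∧ pvGcell grid x y = 0) := by
        rintro ⟨h1, h2, h3⟩
        exact hn ⟨h1 ▸ List.mem_cons_self, h2, h3⟩
      rw [ihb x y hx hy hn1]
      exact h1b x y hx hy hn2
    · intro x hx y hy hgy
      rcases List.mem_cons.mp hx with rfl | hxI
      · by_cases hxI' : x ∈ I
        · exact iha x hxI' y hy hgy
        · have hn : ¬ (x ∈ I ∧ y ∈ J ∧ pvGcell grid x y = 0) := by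
            rintro ⟨h1, _, _⟩; exact hxI' h1
          rw [ihb x y hi.1 (hJ y hy).1 hn]
          exact h1a y hy hgy
      · exact iha x hxI y hy hgy
    · intro z
      rw [ihc z, h1c z]
      constructor
      · rintro ((hq | ⟨h1, h2, h3⟩) | ⟨h1, h2, h3⟩)
        · exact Or.inl hq
        · exact Or.inr ⟨h1 ▸ List.mem_cons_self, h2, h1 ▸ h3⟩
        · exact Or.inr ⟨List.mem_cons_of_mem _ h1, h2, h3⟩
      · rintro (hq | ⟨h1, h2, h3⟩)
        · exact Or.inl (Or.inl hq)
        · rcases List.mem_cons.mp h1 with h1' | h1'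
          · exact Or.inl (Or.inr ⟨h1', h2, h1' ▸ h3⟩)
          · exact Or.inr ⟨h1', h2, h3⟩

-- the frontier-form initial state: value 0 exactly at in-bounds 0-cells, and the initial
-- frontier is exactly the list of in-bounds 0-cells
theorem pvBinit_char (m n : Int) (grid : List (List Int)) :
    (∀ x y : Int, pvInb m n (x, y) →
      pvDget (pvBinit m n grid).2 x y = if pvGcell grid x y = 0 then some 0 else none)
    ∧ (∀ z : Int × Int, z ∈ (pvBinit m n grid).1 ↔ (pvInb m n z ∧ pvGcell grid z.1 z.2 = 0)) := by
  have hS0 : PvShaped m n (List.replicate m.toNat (List.replicate n.toNat (none : Option Int))) := by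
    refine ⟨by simp, ?_⟩
    intro r hr
    rw [List.eq_of_mem_replicate hr]
    simp
  have hJ : ∀ j ∈ PySem.List.pyRange 0 n 1, 0 ≤ j ∧ j < n := by
    intro j hj
    rw [PySem.List.mem_pyRange_one] at hj
    exact hj
  have hI : ∀ i ∈ PySem.List.pyRange 0 m 1, 0 ≤ i ∧ i < m := by
    intro i hi
    rw [PySem.List.mem_pyRange_one] at hi
    exact hi
  obtain ⟨hS', hb, ha, hc⟩ := pvInitC_outer m n grid (PySem.List.pyRange 0 n 1) hJ
    (PySem.List.pyRange 0 m 1) hI []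
    (List.replicate m.toNat (List.replicate n.toNat (none : Option Int))) hS0
  unfold pvBinit
  constructor
  · intro x y hxy
    by_cases hg0 : pvGcell grid x y = 0
    · rw [if_pos hg0]
      exact ha x (PySem.List.mem_pyRange_one.mpr ⟨hxy.1, hxy.2.1⟩)
        y (PySem.List.mem_pyRange_one.mpr ⟨hxy.2.2.1, hxy.2.2.2⟩) hg0
    · rw [if_neg hg0]
      rw [hb x y hxy.1 hxy.2.2.1 (by rintro ⟨_, _, h3⟩; exact hg0 h3)]
      exact pvRep_none _ _ x y
  · intro z
    rw [hc z]
    simp only [List.not_mem_nil, false_or]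
    rw [PySem.List.mem_pyRange_one, PySem.List.mem_pyRange_one]
    unfold pvInb
    constructor
    · rintro ⟨⟨h1, h2⟩, ⟨h3, h4⟩, h5⟩
      exact ⟨⟨h1, h2, h3, h4⟩, h5⟩
    · rintro ⟨⟨h1, h2, h3, h4⟩, h5⟩
      exact ⟨⟨h1, h2⟩, ⟨h3, h4⟩, h5⟩

theorem pvCinit_shape (m n : Int) (grid : List (List Int)) : PvShaped m n (pvCinit m n grid) := by
  constructor
  · simp [pvCinit, PySem.List.length_pyRange_one]
  · intro r hr
    simp only [pvCinit, List.mem_map] at hr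
    rcases hr with ⟨i, _, rfl⟩
    simp [PySem.List.length_pyRange_one]

theorem pvCinit_get (m n : Int) (grid : List (List Int)) :
    ∀ x y : Int, pvInb m n (x, y) →
      pvDget (pvCinit m n grid) x y = if pvGcell grid x y = 0 then some 0 else none := by
  intro x y hxy
  obtain ⟨h1, h2, h3, h4⟩ := hxy
  simp only at h1 h2 h3 h4
  unfold pvDget pvCinit
  have hxm : x.toNat < ((PySem.List.pyRange 0 m 1).map (fun i =>
      (PySem.List.pyRange 0 n 1).map (fun j =>
        if pvGcell grid i j = 0 then some (0 : Int) else none))).length := by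
    simp [PySem.List.length_pyRange_one]
    omega
  rw [List.getD_eq_getElem _ [] hxm, List.getElem_map, PySem.List.getElem_pyRange_one]
  have hx : (0 : Int) + (x.toNat : Int) = x := by omega
  rw [hx]
  have hyn : y.toNat < ((PySem.List.pyRange 0 n 1).map (fun j =>
      if pvGcell grid x j = 0 then some (0 : Int) else none)).length := by
    simp [PySem.List.length_pyRange_one]
    omega
  rw [List.getD_eq_getElem _ none hyn, List.getElem_map, PySem.List.getElem_pyRange_one]
  have hy : (0 : Int) + (y.toNat : Int) = y := by omega
  rw [hy]

theorem pvCinit_eq (m n : Int) (grid : List (List Int)) :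
    pvCinit m n grid = (pvBinit m n grid).2 := by
  apply pvExt m n _ _ (pvCinit_shape m n grid) (pvInit_rel m n grid).2.2.1
  intro x y hxy
  rw [pvCinit_get m n grid x y hxy, (pvBinit_char m n grid).1 x y hxy]

-- ===== VERDICT (by name: the statement is the Claim_ definition above) =====
theorem min_distance_sum_spec : Claim_equal_min_distance_sum := by
  intro m n grid hdom hpre
  unfold Spec_min_distance_sum min_distance_sum min_distance_sum_alt
  obtain ⟨he1, he2, hS, hL, hk, hl⟩ := pvInit_rel m n grid
  obtain ⟨hget, hmem⟩ := pvBinit_char m n grid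
  show pvResScanA m n grid
      (pvAloop m n grid (2 * (m.toNat * n.toNat) + 2) (pvAinit m n grid).1 (pvAinit m n grid).2)
    = pvResScanB m n grid
      (pvCloop m n grid (m.toNat * n.toNat + 2) 0 (pvCinit m n grid))
  rw [he1, he2]
  rw [pvMain m n grid (m.toNat * n.toNat + 2) (pvBinit m n grid).1 0 (pvBinit m n grid).2
    (2 * (m.toNat * n.toNat) + 2) hS (pvAllLe_mono hL (by omega)) (by omega) (by omega)]
  rw [pvLoopEq m n grid (m.toNat * n.toNat + 2) (pvBinit m n grid).1 0 (pvBinit m n grid).2 hS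
    (fun x y v _ _ hg => pvDget_some_bound _ 0 x y v hL hg)
    (fun c hc => ((hmem c).mp hc).1)
    (by
      intro z hz
      rw [hget z.1 z.2 (by rwa [Prod.mk.eta])]
      by_cases hg0 : pvGcell grid z.1 z.2 = 0
      · rw [if_pos hg0]
        constructor
        · intro _
          exact (hmem z).mpr ⟨hz, hg0⟩
        · intro _
          rfl
      · rw [if_neg hg0]
        constructor
        · intro h
          cases h
        · intro hm
          exact absurd ((hmem z).mp hm).2 hg0)]
  rw [pvCinit_eq m n grid]
  rfl
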